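-- pv_equiv track=rewrite | github.com/WSm-77/WDI | set4/6.py | singletons
-- ===== SOURCE A (Python) =====
-- def findNotReached(reachedEnd):
--     notReached = 0
--     while reachedEnd[notReached]:
--         notReached += 1
--     #end while
--     return notReached
--
-- def findMinIndex(tab, collumIndexesTab, reachedEnd):
--     indexTabLen = len(collumIndexesTab)
--     isUniqe = False
--     minIndex = 0
--     while not isUniqe and not everyReachedEnd(reachedEnd):
--         minIndex = findNotReached(reachedEnd)
--         isUniqe = True
--         notUniqeNumber = 0
--         for rowIndex in range(minIndex + 1, indexTabLen):
--             if reachedEnd[rowIndex]: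
--                 continue
--             #end if
--             currentNumber = tab[rowIndex][collumIndexesTab[rowIndex]]
--             if currentNumber == tab[minIndex][collumIndexesTab[minIndex]]:
--                 isUniqe = False
--                 notUniqeNumber = currentNumber
--             elif currentNumber < tab[minIndex][collumIndexesTab[minIndex]]:
--                 minIndex = rowIndex
--                 isUniqe = True
--             #end if
--         #end for
--
--         #update not reached tab
--         if not isUniqe:
--             for updateIndex in range(minIndex, indexTabLen):
--                 if reachedEnd[updateIndex]:
--                     continue
--                 #end if
--                 if notUniqeNumber != tab[updateIndex][collumIndexesTab[updateIndex]]: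
--                     continue
--                 #end if
--                 collumIndexesTab[updateIndex] += 1
--                 if collumIndexesTab[updateIndex] == indexTabLen:
--                     reachedEnd[updateIndex] = True
--                 #end if
--             #end for
--         #end if
--     #end while
--     return minIndex
--
-- def everyReachedEnd(reachedEnd):
--     everyReached = True
--     for i in range(len(reachedEnd)):
--         if not reachedEnd[i]:
--             everyReached = False
--             break
--         #end if
--     #end for
--     return everyReached
--
-- def singletons(tab):
--     tabLen = len(tab)
--     tab2 = [0 for _ in range(tabLen*tabLen)]
--     tab2Index = 0
--     collumIndexesTab = [0 for _ in range(tabLen)]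
--     reachedEnd = [False for _ in range(tabLen)]
--     while True:
--         minElementRowIndex = findMinIndex(tab, collumIndexesTab, reachedEnd)
--         if everyReachedEnd(reachedEnd):
--             break
--         #end if
--         tab2[tab2Index] = tab[minElementRowIndex][collumIndexesTab[minElementRowIndex]]
--         tab2Index += 1
--         collumIndexesTab[minElementRowIndex] += 1
--         if collumIndexesTab[minElementRowIndex] == tabLen:
--             reachedEnd[minElementRowIndex] = True
--     #end while
--     return tab2
-- ===== SOURCE B (Python) =====
-- def _insert(heap, t):
--     lo, hi = 0, len(heap)
--     while lo < hi:
--         mid = (lo + hi) // 2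
--         if heap[mid] < t:
--             lo = mid + 1
--         else:
--             hi = mid
--     heap.insert(lo, t)
--
-- def singletons(tab):
--     n = len(tab)
--     heap = []
--     for row in tab:
--         _insert(heap, row[:n])
--     out = []
--     while heap:
--         m = heap[0][0]
--         tails = []
--         while heap and heap[0][0] == m:
--             tails.append(heap.pop(0)[1:])
--         if len(tails) == 1:
--             out.append(m)
--         for t in tails:
--             if t:
--                 _insert(heap, t)
--     return out + [0] * (n * n - len(out))
-- ===== Notes on version B (the rewrite author's own statement) =====
-- stated objective: alternative
-- what changed: Instead of A's repeated linear scans over per-row pointer/flag arrays (findMinIndex restarting until the front minimum is unique), B keeps the remaining row suffixes in a single lexicographically sorted priority queue built and maintained by binary-search insertion: each round pops the leading run of equal-head suffixes in O(1) lookups, emits the head iff the run has length 1, and reinserts the nonempty tails.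
import Mathlib
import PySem

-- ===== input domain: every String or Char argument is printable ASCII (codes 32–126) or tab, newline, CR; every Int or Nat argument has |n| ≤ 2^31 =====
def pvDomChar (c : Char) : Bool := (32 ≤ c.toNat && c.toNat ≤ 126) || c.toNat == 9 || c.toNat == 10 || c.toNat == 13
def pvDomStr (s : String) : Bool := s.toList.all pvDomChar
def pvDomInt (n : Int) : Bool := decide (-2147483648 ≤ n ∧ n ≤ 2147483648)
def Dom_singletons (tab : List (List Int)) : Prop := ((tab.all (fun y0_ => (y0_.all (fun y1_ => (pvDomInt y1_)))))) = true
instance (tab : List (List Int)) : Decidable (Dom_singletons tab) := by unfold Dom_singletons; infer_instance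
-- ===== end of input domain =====

-- B replaces A's pointer/flag arrays and restarting min-scan by a lexicographically sorted
-- priority queue of remaining row suffixes maintained by binary-search insertion; each round
-- pops the leading run of equal-head suffixes and reinserts their nonempty tails (objective:
-- alternative algorithm of similar cost).

-- ===== PORT A =====

-- current front element of row i (indices are in range on every admitted input)
def pvVal (tab : List (List Int)) (i : Nat) (c : Nat) : Int :=
  (tab.getD i []).getD c 0

def findNotReached : List Bool → Nat
  | [] => 0          -- Python would raise IndexError here; A never calls it in this state
  | b :: rest => if b then findNotReached rest + 1 else 0

def everyReachedEnd : List Bool → Bool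
  | [] => true
  | b :: rest => if !b then false else everyReachedEnd rest

-- the for-loop of findMinIndex: state (minIndex, isUniqe, notUniqeNumber)
def fmiScan (tab : List (List Int)) (cols : List Nat) (reached : List Bool) (mi0 : Nat) :
    Nat × Bool × Int :=
  (List.range' (mi0 + 1) (cols.length - (mi0 + 1))).foldl
    (fun st rowIndex =>
      if reached.getD rowIndex false then st
      else
        let cur := pvVal tab rowIndex (cols.getD rowIndex 0)
        if cur = pvVal tab st.1 (cols.getD st.1 0) then (st.1, false, cur)
        else if cur < pvVal tab st.1 (cols.getD st.1 0) then (rowIndex, true, st.2.2)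
        else st)
    (mi0, true, 0)

-- the "update not reached tab" for-loop of findMinIndex
def fmiUpdate (tab : List (List Int)) (mi : Nat) (dupv : Int) (st : List Nat × List Bool) :
    List Nat × List Bool :=
  (List.range' mi (st.1.length - mi)).foldl
    (fun s ui =>
      if s.2.getD ui false then s
      else if dupv ≠ pvVal tab ui (s.1.getD ui 0) then s
      else
        let c' := s.1.getD ui 0 + 1
        let cols' := s.1.set ui c'
        if c' = cols'.length then (cols', s.2.set ui true) else (cols', s.2))
    st

-- the while-loop of findMinIndex (fuel makes the same computation total; never exhausted on Pre_)
def fmiLoop (tab : List (List Int)) :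
    Nat → Bool → Nat → List Nat × List Bool → Nat × List Nat × List Bool
  | 0, _, mi, st => (mi, st)
  | fuel + 1, isUniqe, mi, st =>
    if !isUniqe && !everyReachedEnd st.2 then
      let mi0 := findNotReached st.2
      let r := fmiScan tab st.1 st.2 mi0
      if !r.2.1 then fmiLoop tab fuel r.2.1 r.1 (fmiUpdate tab r.1 r.2.2 st)
      else fmiLoop tab fuel r.2.1 r.1 st
    else (mi, st)

def findMinIndex (tab : List (List Int)) (st : List Nat × List Bool) :
    Nat × List Nat × List Bool :=
  fmiLoop tab (tab.length * tab.length + 1) false 0 st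

-- the outer while-loop of singletons
def singletonsLoop (tab : List (List Int)) :
    Nat → List Nat × List Bool → List Int → Nat → List Int
  | 0, _, tab2, _ => tab2
  | fuel + 1, st, tab2, idx =>
    let r := findMinIndex tab st
    if everyReachedEnd r.2.2 then tab2
    else
      let mi := r.1
      let cols := r.2.1
      let tab2' := tab2.set idx (pvVal tab mi (cols.getD mi 0))
      let c' := cols.getD mi 0 + 1
      let cols' := cols.set mi c'
      let reached' := if c' = cols'.length then r.2.2.set mi true else r.2.2
      singletonsLoop tab fuel (cols', reached') tab2' (idx + 1)

def singletons (tab : List (List Int)) : List Int :=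
  singletonsLoop tab (tab.length * tab.length + 1)
    (List.replicate tab.length 0, List.replicate tab.length false)
    (List.replicate (tab.length * tab.length) 0) 0

-- ===== PORT B =====

-- Python's '<' on lists of ints, lexicographic
def pyListLt : List Int → List Int → Bool
  | [], [] => false
  | [], _ :: _ => true
  | _ :: _, [] => false
  | a :: as_, b :: bs => if a < b then true else if b < a then false else pyListLt as_ bs

-- the binary-search while-loop of _insert (fuel = hi - lo bounds its iterations and makes
-- the same computation total; it is never exhausted)
def pvInsPos (heap : List (List Int)) (t : List Int) : Nat → Nat → Nat → Nat
  | 0, lo, _ => lo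
  | fuel + 1, lo, hi =>
    if lo < hi then
      let mid := (lo + hi) / 2
      if pyListLt (heap.getD mid []) t then pvInsPos heap t fuel (mid + 1) hi
      else pvInsPos heap t fuel lo mid
    else lo

-- heap.insert(lo, t) of _insert
def pvInsert (heap : List (List Int)) (t : List Int) : List (List Int) :=
  heap.insertIdx (pvInsPos heap t heap.length 0 heap.length) t

-- the inner while-loop: pop the leading run with first element m, collecting the tails s[1:]
-- (heap elements are nonempty in every reachable state, so headD 0 is Python's s[0])
def pvPopRun (m : Int) : List (List Int) → List (List Int) × List (List Int)
  | [] => ([], [])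
  | s :: hs =>
    if s.headD 0 = m then
      let r := pvPopRun m hs
      (s.tail :: r.1, r.2)
    else ([], s :: hs)

-- the outer while-loop of Source B (fuel makes the same computation total; never exhausted)
def pvBLoop : Nat → List (List Int) → List Int → List Int
  | 0, _, out => out
  | fuel + 1, heap, out =>
    if heap.isEmpty then out
    else
      let m := (heap.headD []).headD 0
      let r := pvPopRun m heap
      let out' := if r.1.length = 1 then out ++ [m] else out
      let heap' := r.1.foldl (fun h t => if t.isEmpty then h else pvInsert h t) r.2
      pvBLoop fuel heap' out'

def singletons_alt (tab : List (List Int)) : List Int :=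
  let n := tab.length
  let heap := tab.foldl (fun h row => pvInsert h (row.take n)) []
  let out := pvBLoop (n * n + 1) heap []
  out ++ List.replicate (n * n - out.length) 0

-- ===== PRECONDITION & SPEC =====
-- Pre_: every row must have at least len(tab) entries; on any shorter row the Python A
-- raises IndexError before returning.
def Pre_singletons (tab : List (List Int)) : Prop :=
  ∀ row ∈ tab, tab.length ≤ row.length
instance (tab : List (List Int)) : Decidable (Pre_singletons tab) := by
  unfold Pre_singletons; infer_instance

def pvWitness_singletons : List (List Int) := [[1, 2], [1, 3]]

def Spec_singletons (tab : List (List Int)) (out : List Int) : Prop := out = singletons_alt tab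
instance (tab : List (List Int)) (out : List Int) : Decidable (Spec_singletons tab out) := by
  unfold Spec_singletons; infer_instance

-- ===== CLAIM (what is proved, stated in full; the proofs are below) =====
def Claim_equal_singletons : Prop :=
  ∀ (tab : List (List Int)), Dom_singletons tab → Pre_singletons tab →
    Spec_singletons tab (singletons tab)

-- ===== LEMMAS AND PROOFS =====

-- the common round-level abstraction both loops are reduced to: an explicit list of
-- (row, column) fronts, the minimum of the front values, emission iff it is unique,
-- and simultaneous advance of all tied fronts
def pvRoundLoop (tab : List (List Int)) (n : Nat) :
    Nat → List (Nat × Nat) → List Int → List Int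
  | 0, _, out => out
  | fuel + 1, fronts, out =>
    if fronts.isEmpty then out
    else
      let vals := fronts.map (fun p => pvVal tab p.1 p.2)
      let m := (PySem.List.min? vals (fun x => x)).getD 0
      let out' := if vals.count m = 1 then out ++ [m] else out
      let fronts' := (fronts.zip vals).filterMap (fun pv =>
        if pv.2 ≠ m ∨ pv.1.2 + 1 < n then
          some (if pv.2 = m then (pv.1.1, pv.1.2 + 1) else pv.1)
        else none)
      pvRoundLoop tab n fuel fronts' out'

-- helper list lemmas ---------------------------------------------------------

theorem pvGetD_set_ne {α : Type} (l : List α) {i j : Nat} (v d : α) (h : i ≠ j) :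
    (l.set i v).getD j d = l.getD j d := by
  simp [List.getD, List.getElem?_set_ne h]

theorem pvGetD_set_self {α : Type} (l : List α) {i : Nat} (v d : α) (h : i < l.length) :
    (l.set i v).getD i d = v := by
  simp [List.getD, h]

theorem pvFilterMap_if {α β : Type} (p : α → Bool) (g : α → β) (l : List α) :
    l.filterMap (fun j => if p j then some (g j) else none) = (l.filter p).map g := by
  induction l with
  | nil => rfl
  | cons a t ih => by_cases h : p a <;> simp [h, ih]

theorem pvCount_map {α : Type} (a : Int) (f : α → Int) (l : List α) :
    (l.map f).count a = l.countP (fun x => f x == a) := by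
  simp [List.count, List.countP_map]; rfl

theorem pvFilterMap_off {α β : Type} (p : α → Bool) (q : α → Option β) (l : List α)
    (h : ∀ a ∈ l, p a = false → q a = none) :
    (l.filter p).filterMap q = l.filterMap q := by
  induction l with
  | nil => rfl
  | cons a t ih =>
    have ih' := ih (fun a ha => h a (List.mem_cons_of_mem _ ha))
    by_cases hp : p a
    · simp [hp, List.filterMap_cons, ih']
    · have := h a (List.mem_cons_self) (by simpa using hp)
      simp [hp, this, ih']

-- proof-land views of a state (cols, reached) --------------------------------

def pvCols (st : List Nat × List Bool) (j : Nat) : Nat := st.1.getD j 0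
def pvActb (st : List Nat × List Bool) (j : Nat) : Bool := !st.2.getD j false
def pvValAt (tab : List (List Int)) (st : List Nat × List Bool) (j : Nat) : Int :=
  pvVal tab j (pvCols st j)

-- the list of active row indices, in increasing order
def pvC (tab : List (List Int)) (st : List Nat × List Bool) : List Nat :=
  (List.range tab.length).filter (pvActb st)

def InvA (tab : List (List Int)) (st : List Nat × List Bool) : Prop :=
  st.1.length = tab.length ∧ st.2.length = tab.length ∧
  ∀ j, j < tab.length →
    pvCols st j ≤ tab.length ∧ st.2.getD j false = decide (pvCols st j = tab.length)

def measA (tab : List (List Int)) (st : List Nat × List Bool) : Nat :=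
  ∑ j ∈ Finset.range tab.length, (tab.length - pvCols st j)

def frontsOf (tab : List (List Int)) (st : List Nat × List Bool) : List (Nat × Nat) :=
  (List.range tab.length).filterMap
    (fun j => if pvCols st j = tab.length then none else some (j, pvCols st j))

def pvValsOf (tab : List (List Int)) (st : List Nat × List Bool) : List Int :=
  (frontsOf tab st).map (fun p => pvVal tab p.1 p.2)

def curMin (tab : List (List Int)) (st : List Nat × List Bool) : Int :=
  (PySem.List.min? (pvValsOf tab st) (fun x => x)).getD 0

-- basic facts ----------------------------------------------------------------

theorem pvActb_iff (tab : List (List Int)) (st : List Nat × List Bool)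
    (hInv : InvA tab st) (j : Nat) (hj : j < tab.length) :
    pvActb st j = true ↔ pvCols st j ≠ tab.length := by
  have h := (hInv.2.2 j hj).2
  unfold pvActb
  rw [h]
  by_cases hc : pvCols st j = tab.length <;> simp [hc]

theorem pvFrontsOf_eq (tab : List (List Int)) (st : List Nat × List Bool)
    (hInv : InvA tab st) :
    frontsOf tab st = (pvC tab st).map (fun j => (j, pvCols st j)) := by
  unfold frontsOf pvC
  rw [← pvFilterMap_if (pvActb st) (fun j => (j, pvCols st j)) (List.range tab.length)]
  apply List.filterMap_congr
  intro j hj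
  have hj' : j < tab.length := List.mem_range.mp hj
  by_cases ha : pvActb st j = true
  · have := (pvActb_iff tab st hInv j hj').mp ha
    simp [ha, this]
  · have hb : pvActb st j = false := by simpa using ha
    have : pvCols st j = tab.length := by
      by_contra hne
      exact ha ((pvActb_iff tab st hInv j hj').mpr hne)
    simp [hb, this]

theorem pvMem_pvC (tab : List (List Int)) (st : List Nat × List Bool) (j : Nat) :
    j ∈ pvC tab st ↔ j < tab.length ∧ pvActb st j = true := by
  unfold pvC
  simp [List.mem_filter, List.mem_range]

theorem pvC_sorted (tab : List (List Int)) (st : List Nat × List Bool) :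
    (pvC tab st).Pairwise (· < ·) :=
  (List.pairwise_lt_range).filter _

theorem pvEvery_eq_all (r : List Bool) : everyReachedEnd r = r.all (fun b => b) := by
  induction r with
  | nil => rfl
  | cons b t ih => cases b <;> simp [everyReachedEnd, ih]

theorem pvEvery_true_iff (tab : List (List Int)) (st : List Nat × List Bool)
    (hInv : InvA tab st) :
    everyReachedEnd st.2 = true ↔ ∀ j, j < tab.length → pvCols st j = tab.length := by
  rw [pvEvery_eq_all]
  constructor
  · intro h j hj
    have hm : st.2.getD j false = true := by
      have hjlen : j < st.2.length := by rw [hInv.2.1]; exact hj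
      rw [List.getD_eq_getElem st.2 false hjlen]
      have := List.all_eq_true.mp h (st.2[j]) (List.getElem_mem hjlen)
      simpa using this
    have := (hInv.2.2 j hj).2
    rw [hm] at this
    exact of_decide_eq_true this.symm
  · intro h
    apply List.all_eq_true.mpr
    intro b hb
    obtain ⟨i, hi, rfl⟩ := List.getElem_of_mem hb
    have hi' : i < tab.length := by rw [← hInv.2.1]; exact hi
    have := (hInv.2.2 i hi').2
    have hg : st.2.getD i false = st.2[i] := List.getD_eq_getElem st.2 false hi
    rw [hg] at this
    rw [this]
    simp [h i hi']

theorem pvFronts_nil_iff (tab : List (List Int)) (st : List Nat × List Bool) :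
    frontsOf tab st = [] ↔ ∀ j, j < tab.length → pvCols st j = tab.length := by
  unfold frontsOf
  rw [List.filterMap_eq_nil_iff]
  constructor
  · intro h j hj
    have := h j (List.mem_range.mpr hj)
    by_contra hne
    simp [hne] at this
  · intro h j hj
    simp [h j (List.mem_range.mp hj)]

theorem pvMeas_zero_iff (tab : List (List Int)) (st : List Nat × List Bool)
    (hInv : InvA tab st) :
    measA tab st = 0 ↔ ∀ j, j < tab.length → pvCols st j = tab.length := by
  unfold measA
  rw [Finset.sum_eq_zero_iff]
  constructor
  · intro h j hj
    have := h j (Finset.mem_range.mpr hj)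
    have hle := (hInv.2.2 j hj).1
    omega
  · intro h j hj
    have := h j (Finset.mem_range.mp hj)
    omega

theorem pvMeas_le (tab : List (List Int)) (st : List Nat × List Bool) :
    measA tab st ≤ tab.length * tab.length := by
  unfold measA
  calc ∑ j ∈ Finset.range tab.length, (tab.length - pvCols st j)
      ≤ ∑ _j ∈ Finset.range tab.length, tab.length :=
        Finset.sum_le_sum (fun j _ => Nat.sub_le _ _)
    _ = tab.length * tab.length := by simp [Finset.sum_const]

theorem pvFindNotReached_spec (r : List Bool) (h : everyReachedEnd r = false) :
    findNotReached r < r.length ∧ r.getD (findNotReached r) false = false ∧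
    ∀ j, j < findNotReached r → r.getD j false = true := by
  induction r with
  | nil => simp [everyReachedEnd] at h
  | cons b t ih =>
    cases b with
    | false =>
      refine ⟨by simp [findNotReached], by simp [findNotReached], ?_⟩
      intro j hj
      simp [findNotReached] at hj
    | true =>
      have ht : everyReachedEnd t = false := by simpa [everyReachedEnd] using h
      obtain ⟨h1, h2, h3⟩ := ih ht
      refine ⟨by simp [findNotReached]; omega, by simpa [findNotReached] using h2, ?_⟩
      intro j hj
      cases j with
      | zero => simp
      | succ j' =>
        simp [findNotReached] at hj
        simpa using h3 j' (by omega)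


-- the scan body of findMinIndex, with the skip of reached rows removed -------

def pvScanG (tab : List (List Int)) (st : List Nat × List Bool)
    (s : Nat × Bool × Int) (j : Nat) : Nat × Bool × Int :=
  let cur := pvValAt tab st j
  if cur = pvValAt tab st s.1 then (s.1, false, cur)
  else if cur < pvValAt tab st s.1 then (j, true, s.2.2)
  else s

theorem pvScanFold_spec (tab : List (List Int)) (st : List Nat × List Bool)
    (mi0 : Nat) (T : List Nat) :
    (T.foldl (pvScanG tab st) (mi0, true, 0)).1 ∈ mi0 :: T ∧
    (∀ j ∈ mi0 :: T,
      pvValAt tab st (T.foldl (pvScanG tab st) (mi0, true, 0)).1 ≤ pvValAt tab st j) ∧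
    ((T.foldl (pvScanG tab st) (mi0, true, 0)).2.1 =
      decide ((mi0 :: T).countP
        (fun j => pvValAt tab st j ==
          pvValAt tab st (T.foldl (pvScanG tab st) (mi0, true, 0)).1) = 1)) ∧
    ((T.foldl (pvScanG tab st) (mi0, true, 0)).2.1 = false →
      (T.foldl (pvScanG tab st) (mi0, true, 0)).2.2 =
        pvValAt tab st (T.foldl (pvScanG tab st) (mi0, true, 0)).1) ∧
    ∃ D1 D2, mi0 :: T = D1 ++ (T.foldl (pvScanG tab st) (mi0, true, 0)).1 :: D2 ∧
      ∀ j ∈ D1, pvValAt tab st (T.foldl (pvScanG tab st) (mi0, true, 0)).1 <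
        pvValAt tab st j := by
  induction T using List.reverseRecOn with
  | nil =>
    refine ⟨by simp, by simp, by simp, by simp, [], [], by simp, by simp⟩
  | append_singleton T j ih =>
    obtain ⟨hmem, hmin, hcnt, hdup, D1, D2, hsplit, hD1⟩ := ih
    set r := T.foldl (pvScanG tab st) (mi0, true, 0) with hr
    have hfold : (T ++ [j]).foldl (pvScanG tab st) (mi0, true, 0) = pvScanG tab st r j := by
      rw [List.foldl_append]; rfl
    have hL : mi0 :: (T ++ [j]) = (mi0 :: T) ++ [j] := by simp
    rw [hfold, hL]
    unfold pvScanG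
    by_cases heq : pvValAt tab st j = pvValAt tab st r.1
    · -- duplicate of the current minimum
      rw [if_pos heq]
      dsimp only
      have hpos : 0 < (mi0 :: T).countP
          (fun k => pvValAt tab st k == pvValAt tab st r.1) :=
        List.countP_pos_iff.mpr ⟨r.1, hmem, by simp⟩
      refine ⟨List.mem_append_left _ hmem, ?_, ?_, fun _ => heq, D1, D2 ++ [j],
        by rw [hsplit]; simp, hD1⟩
      · intro k hk
        rcases List.mem_append.mp hk with hk | hk
        · exact hmin k hk
        · simp at hk; subst hk; exact le_of_eq heq.symm
      · rw [List.countP_append]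
        have h1 : [j].countP (fun k => pvValAt tab st k == pvValAt tab st r.1) = 1 := by
          simp [heq]
        rw [h1]
        symm
        rw [decide_eq_false_iff_not]
        omega
    · by_cases hlt : pvValAt tab st j < pvValAt tab st r.1
      · -- strictly smaller: new unique minimum
        rw [if_neg heq, if_pos hlt]
        dsimp only
        have hz : (mi0 :: T).countP (fun k => pvValAt tab st k == pvValAt tab st j) = 0 := by
          apply List.countP_eq_zero.mpr
          intro k hk
          have := hmin k hk
          simp only [beq_iff_eq]
          omega
        refine ⟨by simp, ?_, ?_, by simp, mi0 :: T, [], by simp,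
          fun k hk => by have := hmin k hk; omega⟩
        · intro k hk
          rcases List.mem_append.mp hk with hk | hk
          · have := hmin k hk; omega
          · simp at hk; subst hk; exact le_rfl
        · rw [List.countP_append, hz]
          simp
      · -- strictly greater: state unchanged
        have hgt : pvValAt tab st r.1 < pvValAt tab st j := by omega
        rw [if_neg heq, if_neg hlt]
        refine ⟨List.mem_append_left _ hmem, ?_, ?_, hdup, D1, D2 ++ [j],
          by rw [hsplit]; simp, hD1⟩
        · intro k hk
          rcases List.mem_append.mp hk with hk | hk
          · exact hmin k hk
          · simp at hk; subst hk; omega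
        · rw [List.countP_append]
          have h0 : [j].countP (fun k => pvValAt tab st k == pvValAt tab st r.1) = 0 := by
            simp [beq_iff_eq]; omega
          rw [h0, hcnt]; norm_num


theorem pvC_decomp (tab : List (List Int)) (st : List Nat × List Bool)
    (hInv : InvA tab st) (hev : everyReachedEnd st.2 = false) :
    pvC tab st = findNotReached st.2 ::
      (List.range' (findNotReached st.2 + 1)
        (tab.length - (findNotReached st.2 + 1))).filter (pvActb st) := by
  obtain ⟨h1, h2, h3⟩ := pvFindNotReached_spec st.2 hev
  set mi0 := findNotReached st.2 with hmi0
  have hn : st.2.length = tab.length := hInv.2.1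
  have hlt : mi0 < tab.length := by omega
  have hact : pvActb st mi0 = true := by unfold pvActb; rw [h2]; rfl
  unfold pvC
  rw [List.range_eq_range']
  have hsplit : List.range' 0 tab.length =
      List.range' 0 mi0 ++ List.range' mi0 (tab.length - mi0) := by
    have h := @List.range'_append 0 mi0 (tab.length - mi0) 1
    simp only [Nat.one_mul, Nat.zero_add] at h
    rw [h]
    congr 1
    omega
  rw [hsplit, List.filter_append]
  have hnil : (List.range' 0 mi0).filter (pvActb st) = [] := by
    apply List.filter_eq_nil_iff.mpr
    intro j hj
    have hjlt : j < mi0 := by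
      have := List.mem_range'_1.mp hj
      omega
    unfold pvActb
    rw [h3 j hjlt]
    simp
  rw [hnil, List.nil_append]
  have hk : tab.length - mi0 = (tab.length - (mi0 + 1)) + 1 := by omega
  rw [hk, List.range'_succ, List.filter_cons_of_pos hact]

theorem pvFmiScan_eq (tab : List (List Int)) (st : List Nat × List Bool) (mi0 : Nat) :
    fmiScan tab st.1 st.2 mi0 =
      ((List.range' (mi0 + 1) (st.1.length - (mi0 + 1))).filter (pvActb st)).foldl
        (pvScanG tab st) (mi0, true, 0) := by
  unfold fmiScan
  rw [List.foldl_filter]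
  congr 1
  funext s j
  unfold pvActb pvScanG pvValAt pvCols pvVal
  cases h : st.2.getD j false <;> simp [h]

-- summary of what A's inner scan computes, in terms of the active rows pvC
theorem pvFmiScan_spec (tab : List (List Int)) (st : List Nat × List Bool)
    (hInv : InvA tab st) (hev : everyReachedEnd st.2 = false) :
    (fmiScan tab st.1 st.2 (findNotReached st.2)).1 ∈ pvC tab st ∧
    (∀ j ∈ pvC tab st,
      pvValAt tab st (fmiScan tab st.1 st.2 (findNotReached st.2)).1 ≤ pvValAt tab st j) ∧
    ((fmiScan tab st.1 st.2 (findNotReached st.2)).2.1 =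
      decide ((pvC tab st).countP (fun j => pvValAt tab st j ==
        pvValAt tab st (fmiScan tab st.1 st.2 (findNotReached st.2)).1) = 1)) ∧
    ((fmiScan tab st.1 st.2 (findNotReached st.2)).2.1 = false →
      (fmiScan tab st.1 st.2 (findNotReached st.2)).2.2 =
        pvValAt tab st (fmiScan tab st.1 st.2 (findNotReached st.2)).1) ∧
    (∀ j ∈ pvC tab st,
      pvValAt tab st j = pvValAt tab st (fmiScan tab st.1 st.2 (findNotReached st.2)).1 →
      (fmiScan tab st.1 st.2 (findNotReached st.2)).1 ≤ j) := by
  have hdec := pvC_decomp tab st hInv hev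
  have hlen : st.1.length = tab.length := hInv.1
  have heq : fmiScan tab st.1 st.2 (findNotReached st.2) =
      ((List.range' (findNotReached st.2 + 1)
        (tab.length - (findNotReached st.2 + 1))).filter (pvActb st)).foldl
        (pvScanG tab st) (findNotReached st.2, true, 0) := by
    rw [pvFmiScan_eq, hlen]
  obtain ⟨hmem, hmin, hcnt, hdup, D1, D2, hsplit, hD1⟩ :=
    pvScanFold_spec tab st (findNotReached st.2)
      ((List.range' (findNotReached st.2 + 1)
        (tab.length - (findNotReached st.2 + 1))).filter (pvActb st))
  rw [← hdec] at hmem hmin hcnt hsplit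
  rw [heq]
  refine ⟨hmem, hmin, hcnt, hdup, ?_⟩
  intro j hj hveq
  have hsort : (pvC tab st).Pairwise (· < ·) := pvC_sorted tab st
  rw [hsplit] at hsort hj
  rcases List.mem_append.mp hj with hjD1 | hjtail
  · exact absurd hveq.symm (ne_of_lt (hD1 j hjD1))
  · rcases List.mem_cons.mp hjtail with rfl | hjD2
    · exact le_rfl
    · have := (List.pairwise_cons.mp
        (hsort.sublist (List.sublist_append_right D1 _))).1 j hjD2
      omega


-- the body of findMinIndex's update loop
def pvUpdBody (tab : List (List Int)) (dupv : Int)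
    (s : List Nat × List Bool) (ui : Nat) : List Nat × List Bool :=
  if s.2.getD ui false then s
  else if dupv ≠ pvVal tab ui (s.1.getD ui 0) then s
  else if s.1.getD ui 0 + 1 = (s.1.set ui (s.1.getD ui 0 + 1)).length
    then (s.1.set ui (s.1.getD ui 0 + 1), s.2.set ui true)
    else (s.1.set ui (s.1.getD ui 0 + 1), s.2)

theorem pvFmiUpdate_eq (tab : List (List Int)) (mi : Nat) (dupv : Int)
    (st : List Nat × List Bool) :
    fmiUpdate tab mi dupv st =
      (List.range' mi (st.1.length - mi)).foldl (pvUpdBody tab dupv) st := rfl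

theorem pvUpdBody_len (tab : List (List Int)) (dupv : Int) (s : List Nat × List Bool)
    (ui : Nat) :
    (pvUpdBody tab dupv s ui).1.length = s.1.length ∧
    (pvUpdBody tab dupv s ui).2.length = s.2.length := by
  unfold pvUpdBody
  split_ifs <;> simp

theorem pvFmiUpdate_go (tab : List (List Int)) (dupv : Int) (n : Nat) :
    ∀ (k a : Nat) (s : List Nat × List Bool), s.1.length = n → s.2.length = n →
    ((List.range' a k).foldl (pvUpdBody tab dupv) s).1.length = n ∧
    ((List.range' a k).foldl (pvUpdBody tab dupv) s).2.length = n ∧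
    (∀ j, (j < a ∨ a + k ≤ j) →
      ((List.range' a k).foldl (pvUpdBody tab dupv) s).1.getD j 0 = s.1.getD j 0 ∧
      ((List.range' a k).foldl (pvUpdBody tab dupv) s).2.getD j false = s.2.getD j false) ∧
    (∀ j, a ≤ j → j < a + k → j < n →
      if s.2.getD j false = false ∧ dupv = pvVal tab j (s.1.getD j 0)
      then ((List.range' a k).foldl (pvUpdBody tab dupv) s).1.getD j 0 = s.1.getD j 0 + 1 ∧
        ((List.range' a k).foldl (pvUpdBody tab dupv) s).2.getD j false =
          decide (s.1.getD j 0 + 1 = n)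
      else ((List.range' a k).foldl (pvUpdBody tab dupv) s).1.getD j 0 = s.1.getD j 0 ∧
        ((List.range' a k).foldl (pvUpdBody tab dupv) s).2.getD j false =
          s.2.getD j false) := by
  intro k
  induction k with
  | zero =>
    intro a s h1 h2
    refine ⟨h1, h2, fun j _ => ⟨rfl, rfl⟩, fun j hja hjk _ => by omega⟩
  | succ k ih =>
    intro a s h1 h2
    rw [List.range'_succ, List.foldl_cons]
    set s1 := pvUpdBody tab dupv s a with hs1
    have hl := pvUpdBody_len tab dupv s a
    have hs1len1 : s1.1.length = n := by rw [← hs1] at hl; omega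
    have hs1len2 : s1.2.length = n := by rw [← hs1] at hl; omega
    obtain ⟨r1, r2, roff, rin⟩ := ih (a + 1) s1 hs1len1 hs1len2
    -- how s1 relates to s
    have hoff : ∀ j, j ≠ a → s1.1.getD j 0 = s.1.getD j 0 ∧
        s1.2.getD j false = s.2.getD j false := by
      intro j hj
      rw [hs1]
      unfold pvUpdBody
      split_ifs <;> refine ⟨?_, ?_⟩ <;>
        first
          | rfl
          | rw [pvGetD_set_ne _ _ _ (Ne.symm hj)]
    have hat : a < n →
        (if s.2.getD a false = false ∧ dupv = pvVal tab a (s.1.getD a 0)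
         then s1.1.getD a 0 = s.1.getD a 0 + 1 ∧
           s1.2.getD a false = decide (s.1.getD a 0 + 1 = n)
         else s1.1.getD a 0 = s.1.getD a 0 ∧ s1.2.getD a false = s.2.getD a false) := by
      intro han
      by_cases hr : s.2.getD a false = true
      · rw [if_neg (fun hcon => by rw [hr] at hcon; exact absurd hcon.1 (by decide))]
        rw [hs1]; unfold pvUpdBody; rw [if_pos hr]
        exact ⟨rfl, rfl⟩
      · have hrf : s.2.getD a false = false := by simpa using hr
        by_cases hd : dupv = pvVal tab a (s.1.getD a 0)
        · rw [if_pos ⟨hrf, hd⟩]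
          rw [hs1]; unfold pvUpdBody
          rw [if_neg (by rw [hrf]; exact (by decide)), if_neg (not_not_intro hd)]
          have hsetlen : (s.1.set a (s.1.getD a 0 + 1)).length = n := by simp [h1]
          by_cases hc : s.1.getD a 0 + 1 = (s.1.set a (s.1.getD a 0 + 1)).length
          · rw [if_pos hc]
            rw [hsetlen] at hc
            constructor
            · exact pvGetD_set_self s.1 _ _ (by omega)
            · rw [pvGetD_set_self s.2 _ _ (by omega)]
              exact (decide_eq_true hc).symm
          · rw [if_neg hc]
            rw [hsetlen] at hc
            constructor
            · exact pvGetD_set_self s.1 _ _ (by omega)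
            · rw [hrf]
              exact (decide_eq_false hc).symm
        · rw [if_neg (fun hcon => hd hcon.2)]
          rw [hs1]; unfold pvUpdBody
          rw [if_neg (by rw [hrf]; exact (by decide)), if_pos hd]
          exact ⟨rfl, rfl⟩
    refine ⟨r1, r2, ?_, ?_⟩
    · intro j hj
      have hja : j ≠ a := by omega
      have := roff j (by omega)
      have h2 := hoff j hja
      exact ⟨this.1.trans h2.1, this.2.trans h2.2⟩
    · intro j hja hjk hjn
      by_cases hje : j = a
      · subst hje
        have hs1at := hat hjn
        have := roff j (by omega)
        by_cases hcond : s.2.getD j false = false ∧ dupv = pvVal tab j (s.1.getD j 0)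
        · rw [if_pos hcond] at hs1at ⊢
          exact ⟨this.1.trans hs1at.1, this.2.trans hs1at.2⟩
        · rw [if_neg hcond] at hs1at ⊢
          exact ⟨this.1.trans hs1at.1, this.2.trans hs1at.2⟩
      · have hj1 : a + 1 ≤ j := by omega
        have h2 := hoff j hje
        have := rin j hj1 (by omega) hjn
        rw [h2.1, h2.2] at this
        exact this


-- pointwise summary of A's update loop
theorem pvFmiUpdate_spec (tab : List (List Int)) (st : List Nat × List Bool)
    (mi : Nat) (dupv : Int) (hInv : InvA tab st) (hmi : mi ≤ tab.length) :
    (fmiUpdate tab mi dupv st).1.length = tab.length ∧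
    (fmiUpdate tab mi dupv st).2.length = tab.length ∧
    ∀ j, j < tab.length →
      pvCols (fmiUpdate tab mi dupv st) j =
        (if mi ≤ j ∧ pvActb st j = true ∧ pvValAt tab st j = dupv
         then pvCols st j + 1 else pvCols st j) ∧
      (fmiUpdate tab mi dupv st).2.getD j false =
        decide (pvCols (fmiUpdate tab mi dupv st) j = tab.length) := by
  have hn1 : st.1.length = tab.length := hInv.1
  have hn2 : st.2.length = tab.length := hInv.2.1
  rw [pvFmiUpdate_eq, hn1]
  obtain ⟨r1, r2, roff, rin⟩ :=
    pvFmiUpdate_go tab dupv tab.length (tab.length - mi) mi st hn1 hn2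
  refine ⟨r1, r2, ?_⟩
  intro j hj
  by_cases hjm : mi ≤ j
  · have hjk : j < mi + (tab.length - mi) := by omega
    have h := rin j hjm hjk hj
    by_cases hcond : st.2.getD j false = false ∧ dupv = pvVal tab j (st.1.getD j 0)
    · rw [if_pos hcond] at h
      have hact : pvActb st j = true := by unfold pvActb; rw [hcond.1]; rfl
      have hval : pvValAt tab st j = dupv := hcond.2.symm
      rw [if_pos ⟨hjm, hact, hval⟩]
      unfold pvCols
      refine ⟨h.1, ?_⟩
      rw [h.2, h.1]
    · rw [if_neg hcond] at h
      have hcf : ¬(mi ≤ j ∧ pvActb st j = true ∧ pvValAt tab st j = dupv) := by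
        rintro ⟨-, hact, hval⟩
        apply hcond
        constructor
        · unfold pvActb at hact
          cases hg : st.2.getD j false
          · rfl
          · rw [hg] at hact; exact absurd hact (by decide)
        · exact hval.symm
      rw [if_neg hcf]
      unfold pvCols
      refine ⟨h.1, ?_⟩
      rw [h.2, h.1]
      exact (hInv.2.2 j hj).2
  · have h := roff j (by omega)
    rw [if_neg (fun hcon => hjm hcon.1)]
    unfold pvCols
    refine ⟨h.1, ?_⟩
    rw [h.2, h.1]
    exact (hInv.2.2 j hj).2

-- the abstract one-round advance: every active row whose front equals m moves one column on
def pvAdv (tab : List (List Int)) (st : List Nat × List Bool) (m : Int) (j : Nat) : Nat :=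
  if pvActb st j = true ∧ pvValAt tab st j = m then pvCols st j + 1 else pvCols st j

def stepSt (tab : List (List Int)) (st : List Nat × List Bool) (m : Int) :
    List Nat × List Bool :=
  ((List.range tab.length).map (fun j => pvAdv tab st m j),
   (List.range tab.length).map (fun j => decide (pvAdv tab st m j = tab.length)))

theorem pvCols_stepSt (tab : List (List Int)) (st : List Nat × List Bool) (m : Int)
    (j : Nat) (hj : j < tab.length) :
    pvCols (stepSt tab st m) j = pvAdv tab st m j := by
  unfold pvCols stepSt
  exact PySem.List.getD_map_range _ _ _ _ hj

theorem pvInv_stepSt (tab : List (List Int)) (st : List Nat × List Bool) (m : Int)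
    (hInv : InvA tab st) : InvA tab (stepSt tab st m) := by
  refine ⟨by simp [stepSt], by simp [stepSt], ?_⟩
  intro j hj
  rw [pvCols_stepSt tab st m j hj]
  constructor
  · unfold pvAdv
    split_ifs with h
    · have hc := (hInv.2.2 j hj).1
      have hne := (pvActb_iff tab st hInv j hj).mp h.1
      omega
    · exact (hInv.2.2 j hj).1
  · unfold stepSt
    exact PySem.List.getD_map_range _ _ _ _ hj

theorem pvAdv_le (tab : List (List Int)) (st : List Nat × List Bool) (m : Int)
    (j : Nat) : pvCols st j ≤ pvAdv tab st m j := by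
  unfold pvAdv
  split_ifs <;> omega

theorem pvMeas_stepSt_lt (tab : List (List Int)) (st : List Nat × List Bool) (m : Int)
    (hInv : InvA tab st)
    (hex : ∃ j, j < tab.length ∧ pvActb st j = true ∧ pvValAt tab st j = m) :
    measA tab (stepSt tab st m) < measA tab st := by
  obtain ⟨j0, hj0, hact0, hval0⟩ := hex
  unfold measA
  apply Finset.sum_lt_sum
  · intro j hj
    have hjlt := Finset.mem_range.mp hj
    rw [pvCols_stepSt tab st m j hjlt]
    have := pvAdv_le tab st m j
    omega
  · refine ⟨j0, Finset.mem_range.mpr hj0, ?_⟩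
    rw [pvCols_stepSt tab st m j0 hj0]
    unfold pvAdv
    rw [if_pos ⟨hact0, hval0⟩]
    have hc := (hInv.2.2 j0 hj0).1
    have hne := (pvActb_iff tab st hInv j0 hj0).mp hact0
    omega

theorem pvFrontsOf_congr (tab : List (List Int)) (st st' : List Nat × List Bool)
    (h : ∀ j, j < tab.length → pvCols st j = pvCols st' j) :
    frontsOf tab st = frontsOf tab st' := by
  unfold frontsOf
  apply List.filterMap_congr
  intro j hj
  rw [h j (List.mem_range.mp hj)]

theorem pvMeasA_congr (tab : List (List Int)) (st st' : List Nat × List Bool)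
    (h : ∀ j, j < tab.length → pvCols st j = pvCols st' j) :
    measA tab st = measA tab st' := by
  unfold measA
  apply Finset.sum_congr rfl
  intro j hj
  rw [h j (Finset.mem_range.mp hj)]

-- the current minimum front value, via any witness of minimality among the active rows
theorem pvCurMin_spec (tab : List (List Int)) (st : List Nat × List Bool)
    (hInv : InvA tab st) (j0 : Nat) (hj0 : j0 ∈ pvC tab st)
    (hmin : ∀ j ∈ pvC tab st, pvValAt tab st j0 ≤ pvValAt tab st j) :
    curMin tab st = pvValAt tab st j0 := by
  have hvals : pvValsOf tab st = (pvC tab st).map (pvValAt tab st) := by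
    unfold pvValsOf
    rw [pvFrontsOf_eq tab st hInv, List.map_map]
    rfl
  unfold curMin
  rw [hvals]
  cases hm : PySem.List.min? ((pvC tab st).map (pvValAt tab st)) (fun x => x) with
  | none =>
    rw [PySem.List.min?_eq_none_iff] at hm
    rw [List.map_eq_nil_iff] at hm
    rw [hm] at hj0
    cases hj0
  | some m =>
    have hmem := PySem.List.min?_mem hm
    have hle := PySem.List.min?_isMin hm
    obtain ⟨k, hk, hkm⟩ := List.mem_map.mp hmem
    have h1 : pvValAt tab st j0 ≤ m := by rw [← hkm]; exact hmin k hk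
    have h2 : m ≤ pvValAt tab st j0 :=
      hle (pvValAt tab st j0) (List.mem_map.mpr ⟨j0, hj0, rfl⟩)
    simp only [Option.getD_some]
    omega

theorem pvCount_vals (tab : List (List Int)) (st : List Nat × List Bool)
    (hInv : InvA tab st) (m : Int) :
    (pvValsOf tab st).count m = (pvC tab st).countP (fun j => pvValAt tab st j == m) := by
  unfold pvValsOf
  rw [pvFrontsOf_eq tab st hInv, List.map_map]
  exact pvCount_map m _ _

-- B's one-round front rebuild is exactly the advance of every matching front
theorem pvRebuild (tab : List (List Int)) (st : List Nat × List Bool) (m : Int)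
    (hInv : InvA tab st) :
    ((frontsOf tab st).zip ((frontsOf tab st).map (fun p => pvVal tab p.1 p.2))).filterMap
      (fun pv => if pv.2 ≠ m ∨ pv.1.2 + 1 < tab.length then
        some (if pv.2 = m then (pv.1.1, pv.1.2 + 1) else pv.1) else none)
      = frontsOf tab (stepSt tab st m) := by
  rw [pvFrontsOf_eq tab st hInv]
  rw [List.map_map, List.zip_map', List.filterMap_map]
  have hRHS : frontsOf tab (stepSt tab st m) =
      ((List.range tab.length).filter (pvActb st)).filterMap
        (fun j => if pvCols (stepSt tab st m) j = tab.length then none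
          else some (j, pvCols (stepSt tab st m) j)) := by
    unfold frontsOf
    rw [pvFilterMap_off]
    intro j hj hact
    have hjlt := List.mem_range.mp hj
    have hcols : pvCols st j = tab.length := by
      by_contra hne
      rw [(pvActb_iff tab st hInv j hjlt).mpr hne] at hact
      cases hact
    rw [pvCols_stepSt tab st m j hjlt]
    have hAdv : pvAdv tab st m j = pvCols st j := by
      unfold pvAdv
      exact if_neg (fun hcon => by rw [hact] at hcon; exact absurd hcon.1 (by decide))
    rw [hAdv, if_pos hcols]
  rw [hRHS]
  apply List.filterMap_congr
  intro j hj
  obtain ⟨hjlt, hact⟩ := (pvMem_pvC tab st j).mp (by exact hj)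
  have hcne := (pvActb_iff tab st hInv j hjlt).mp hact
  have hcle := (hInv.2.2 j hjlt).1
  rw [pvCols_stepSt tab st m j hjlt]
  simp only [Function.comp]
  by_cases hv : pvValAt tab st j = m
  · have hAdv : pvAdv tab st m j = pvCols st j + 1 := by
      unfold pvAdv; exact if_pos ⟨hact, hv⟩
    rw [hAdv]
    unfold pvValAt at hv
    by_cases hc1 : pvCols st j + 1 = tab.length
    · rw [if_pos hc1]
      refine if_neg ?_
      rintro (h | h)
      · exact h hv
      · omega
    · rw [if_neg hc1, if_pos (Or.inr (by omega)), if_pos hv]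
  · have hAdv : pvAdv tab st m j = pvCols st j := by
      unfold pvAdv; exact if_neg (fun hcon => hv hcon.2)
    rw [hAdv]
    unfold pvValAt at hv
    rw [if_neg hcne, if_pos (Or.inl hv), if_neg hv]


theorem pvRoundLoop_succ (tab : List (List Int)) (n fuel : Nat) (fronts : List (Nat × Nat))
    (out : List Int) :
    pvRoundLoop tab n (fuel + 1) fronts out =
      if fronts.isEmpty then out
      else pvRoundLoop tab n fuel
        ((fronts.zip (fronts.map (fun p => pvVal tab p.1 p.2))).filterMap (fun pv =>
          if pv.2 ≠ ((PySem.List.min? (fronts.map (fun p => pvVal tab p.1 p.2))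
              (fun x => x)).getD 0) ∨ pv.1.2 + 1 < n then
            some (if pv.2 = ((PySem.List.min? (fronts.map (fun p => pvVal tab p.1 p.2))
                (fun x => x)).getD 0) then (pv.1.1, pv.1.2 + 1) else pv.1)
          else none))
        (if (fronts.map (fun p => pvVal tab p.1 p.2)).count
            ((PySem.List.min? (fronts.map (fun p => pvVal tab p.1 p.2))
              (fun x => x)).getD 0) = 1
         then out ++ [(PySem.List.min? (fronts.map (fun p => pvVal tab p.1 p.2))
            (fun x => x)).getD 0] else out) := rfl

theorem pvAltRound (tab : List (List Int)) (st : List Nat × List Bool) (out : List Int)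
    (fuel : Nat) (hInv : InvA tab st) (hne : frontsOf tab st ≠ []) :
    pvRoundLoop tab tab.length (fuel + 1) (frontsOf tab st) out =
      pvRoundLoop tab tab.length fuel (frontsOf tab (stepSt tab st (curMin tab st)))
        (if (pvValsOf tab st).count (curMin tab st) = 1
         then out ++ [curMin tab st] else out) := by
  rw [pvRoundLoop_succ]
  rw [if_neg (by simpa [List.isEmpty_iff] using hne)]
  rw [show ((PySem.List.min? ((frontsOf tab st).map (fun p => pvVal tab p.1 p.2))
      (fun x => x)).getD 0) = curMin tab st from rfl]
  rw [pvRebuild tab st (curMin tab st) hInv]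
  rw [show ((frontsOf tab st).map (fun p => pvVal tab p.1 p.2)) = pvValsOf tab st from rfl]

theorem pvCurMin_attained (tab : List (List Int)) (st : List Nat × List Bool)
    (hInv : InvA tab st) (hne : frontsOf tab st ≠ []) :
    ∃ j, j < tab.length ∧ pvActb st j = true ∧ pvValAt tab st j = curMin tab st := by
  have hvals : pvValsOf tab st = (pvC tab st).map (pvValAt tab st) := by
    unfold pvValsOf
    rw [pvFrontsOf_eq tab st hInv, List.map_map]
    rfl
  have hCne : pvC tab st ≠ [] := by
    intro hnil
    rw [pvFrontsOf_eq tab st hInv, hnil] at hne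
    exact hne rfl
  cases hm : PySem.List.min? (pvValsOf tab st) (fun x => x) with
  | none =>
    rw [PySem.List.min?_eq_none_iff, hvals, List.map_eq_nil_iff] at hm
    exact absurd hm hCne
  | some m =>
    have hmem := PySem.List.min?_mem hm
    rw [hvals] at hmem
    obtain ⟨k, hk, hkm⟩ := List.mem_map.mp hmem
    obtain ⟨hklt, hact⟩ := (pvMem_pvC tab st k).mp hk
    refine ⟨k, hklt, hact, ?_⟩
    unfold curMin
    rw [hm, Option.getD_some, hkm]

theorem pvNotAll (tab : List (List Int)) (st : List Nat × List Bool)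
    (hInv : InvA tab st) (hev : everyReachedEnd st.2 = false) :
    frontsOf tab st ≠ [] ∧ 1 ≤ measA tab st := by
  have hna : ¬ ∀ j, j < tab.length → pvCols st j = tab.length := by
    intro hall
    rw [(pvEvery_true_iff tab st hInv).mpr hall] at hev
    cases hev
  constructor
  · intro hnil
    exact hna ((pvFronts_nil_iff tab st).mp hnil)
  · rcases Nat.eq_zero_or_pos (measA tab st) with h0 | h1
    · exact absurd ((pvMeas_zero_iff tab st hInv).mp h0) hna
    · exact h1

theorem pvCountP_unique {α : Type} [DecidableEq α] (l : List α) (p : α → Bool)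
    (h1 : l.countP p = 1) {a b : α} (ha : a ∈ l) (hb : b ∈ l)
    (hpa : p a = true) (hpb : p b = true) : a = b := by
  by_contra hne
  have hperm := List.perm_cons_erase ha
  have h2 : l.countP p = (l.erase a).countP p + 1 := by
    rw [hperm.countP_eq]
    rw [List.countP_cons]
    simp [hpa]
  have hbmem : b ∈ l.erase a := (List.mem_erase_of_ne (fun h => hne h.symm)).mpr hb
  have h3 : 0 < (l.erase a).countP p := List.countP_pos_iff.mpr ⟨b, hbmem, hpb⟩
  omega

theorem pvRoundLoop_fuel (tab : List (List Int)) :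
    ∀ (μ f1 f2 : Nat) (st : List Nat × List Bool) (out : List Int), InvA tab st →
    measA tab st ≤ μ → measA tab st + 1 ≤ f1 → measA tab st + 1 ≤ f2 →
    pvRoundLoop tab tab.length f1 (frontsOf tab st) out =
      pvRoundLoop tab tab.length f2 (frontsOf tab st) out := by
  intro μ
  induction μ with
  | zero =>
    intro f1 f2 st out hInv hμ h1 h2
    have hnil : frontsOf tab st = [] :=
      (pvFronts_nil_iff tab st).mpr ((pvMeas_zero_iff tab st hInv).mp (by omega))
    obtain ⟨f1', rfl⟩ : ∃ k, f1 = k + 1 := ⟨f1 - 1, by omega⟩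
    obtain ⟨f2', rfl⟩ : ∃ k, f2 = k + 1 := ⟨f2 - 1, by omega⟩
    rw [pvRoundLoop_succ, pvRoundLoop_succ, hnil]
    rfl
  | succ μ ih =>
    intro f1 f2 st out hInv hμ h1 h2
    by_cases hnil : frontsOf tab st = []
    · obtain ⟨f1', rfl⟩ : ∃ k, f1 = k + 1 := ⟨f1 - 1, by omega⟩
      obtain ⟨f2', rfl⟩ : ∃ k, f2 = k + 1 := ⟨f2 - 1, by omega⟩
      rw [pvRoundLoop_succ, pvRoundLoop_succ, hnil]
      rfl
    · obtain ⟨f1', rfl⟩ : ∃ k, f1 = k + 1 := ⟨f1 - 1, by omega⟩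
      obtain ⟨f2', rfl⟩ : ∃ k, f2 = k + 1 := ⟨f2 - 1, by omega⟩
      rw [pvAltRound tab st out f1' hInv hnil, pvAltRound tab st out f2' hInv hnil]
      have hlt := pvMeas_stepSt_lt tab st (curMin tab st) hInv
        (pvCurMin_attained tab st hInv hnil)
      exact ih f1' f2' (stepSt tab st (curMin tab st)) _
        (pvInv_stepSt tab st (curMin tab st) hInv) (by omega) (by omega) (by omega)


theorem pvFmiLoop_succ (tab : List (List Int)) (fuel : Nat) (u : Bool) (mi : Nat)
    (st : List Nat × List Bool) :
    fmiLoop tab (fuel + 1) u mi st =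
      if !u && !everyReachedEnd st.2 then
        (if !(fmiScan tab st.1 st.2 (findNotReached st.2)).2.1 then
          fmiLoop tab fuel (fmiScan tab st.1 st.2 (findNotReached st.2)).2.1
            (fmiScan tab st.1 st.2 (findNotReached st.2)).1
            (fmiUpdate tab (fmiScan tab st.1 st.2 (findNotReached st.2)).1
              (fmiScan tab st.1 st.2 (findNotReached st.2)).2.2 st)
        else fmiLoop tab fuel (fmiScan tab st.1 st.2 (findNotReached st.2)).2.1
          (fmiScan tab st.1 st.2 (findNotReached st.2)).1 st)
      else (mi, st) := rfl

-- summary of what one call of A's findMinIndex loop does, and its round-level meaning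
theorem pvFmi_spec (tab : List (List Int)) :
    ∀ (fuel mi : Nat) (st : List Nat × List Bool), InvA tab st →
    measA tab st + 1 ≤ fuel →
    InvA tab (fmiLoop tab fuel false mi st).2 ∧
    measA tab (fmiLoop tab fuel false mi st).2 ≤ measA tab st ∧
    (∀ (fB : Nat) (out : List Int), measA tab st + 1 ≤ fB →
      pvRoundLoop tab tab.length fB (frontsOf tab st) out =
        pvRoundLoop tab tab.length (measA tab (fmiLoop tab fuel false mi st).2 + 1)
          (frontsOf tab (fmiLoop tab fuel false mi st).2) out) ∧
    (everyReachedEnd (fmiLoop tab fuel false mi st).2.2 = false →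
      (fmiLoop tab fuel false mi st).1 < tab.length ∧
      pvActb (fmiLoop tab fuel false mi st).2 (fmiLoop tab fuel false mi st).1 = true ∧
      pvValAt tab (fmiLoop tab fuel false mi st).2 (fmiLoop tab fuel false mi st).1 =
        curMin tab (fmiLoop tab fuel false mi st).2 ∧
      (pvValsOf tab (fmiLoop tab fuel false mi st).2).count
        (curMin tab (fmiLoop tab fuel false mi st).2) = 1 ∧
      (∀ j, j < tab.length → pvActb (fmiLoop tab fuel false mi st).2 j = true →
        pvValAt tab (fmiLoop tab fuel false mi st).2 j =
          curMin tab (fmiLoop tab fuel false mi st).2 →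
        j = (fmiLoop tab fuel false mi st).1)) := by
  intro fuel
  induction fuel with
  | zero =>
    intro mi st hInv hf
    omega
  | succ f ih =>
    intro mi st hInv hf
    by_cases hev : everyReachedEnd st.2 = true
    · rw [pvFmiLoop_succ]
      rw [if_neg (by simp [hev])]
      refine ⟨hInv, le_rfl, ?_, ?_⟩
      · intro fB out hfB
        exact pvRoundLoop_fuel tab (measA tab st) fB (measA tab st + 1) st out hInv
          le_rfl hfB le_rfl
      · intro h
        rw [hev] at h
        cases h
    · have hev' : everyReachedEnd st.2 = false := by simpa using hev
      obtain ⟨hneF, hmeas1⟩ := pvNotAll tab st hInv hev'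
      obtain ⟨hmem, hmin, hcnt, hdup, hfirst⟩ := pvFmiScan_spec tab st hInv hev'
      obtain ⟨hamlt, hamact⟩ :=
        (pvMem_pvC tab st (fmiScan tab st.1 st.2 (findNotReached st.2)).1).mp hmem
      have hm : curMin tab st =
          pvValAt tab st (fmiScan tab st.1 st.2 (findNotReached st.2)).1 :=
        pvCurMin_spec tab st hInv _ hmem hmin
      rw [pvFmiLoop_succ]
      rw [if_pos (by simp [hev'])]
      by_cases hu : (fmiScan tab st.1 st.2 (findNotReached st.2)).2.1 = true
      · -- unique minimum found: the loop exits with the scan result and an unchanged state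
        rw [if_neg (by simp [hu])]
        obtain ⟨f', rfl⟩ : ∃ k, f = k + 1 := ⟨f - 1, by omega⟩
        rw [pvFmiLoop_succ, hu]
        rw [if_neg (by simp)]
        refine ⟨hInv, le_rfl, ?_, ?_⟩
        · intro fB out hfB
          exact pvRoundLoop_fuel tab (measA tab st) fB (measA tab st + 1) st out hInv
            le_rfl hfB le_rfl
        · intro _
          have hcnt1 : (pvC tab st).countP
              (fun j => pvValAt tab st j ==
                pvValAt tab st (fmiScan tab st.1 st.2 (findNotReached st.2)).1) = 1 := by
            rw [hu] at hcnt
            exact of_decide_eq_true hcnt.symm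
          refine ⟨hamlt, hamact, hm.symm, ?_, ?_⟩
          · rw [pvCount_vals tab st hInv, hm]
            exact hcnt1
          · intro j hjlt hjact hjval
            have hjC : j ∈ pvC tab st := (pvMem_pvC tab st j).mpr ⟨hjlt, hjact⟩
            refine pvCountP_unique (pvC tab st) _ hcnt1 hjC hmem ?_ (by simp)
            simp only [beq_iff_eq]
            rw [hjval, hm]
      · -- duplicated minimum: one whole dup round, then the loop continues
        have huf : (fmiScan tab st.1 st.2 (findNotReached st.2)).2.1 = false := by
          simpa using hu
        rw [if_pos (by simp [huf])]
        rw [huf]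
        have hdv : (fmiScan tab st.1 st.2 (findNotReached st.2)).2.2 =
            curMin tab st := by
          rw [hdup huf, hm]
        set am := (fmiScan tab st.1 st.2 (findNotReached st.2)).1 with ham
        set upd := fmiUpdate tab am (fmiScan tab st.1 st.2 (findNotReached st.2)).2.2 st
          with hupd
        obtain ⟨hu1, hu2, hupt⟩ := pvFmiUpdate_spec tab st am
          (fmiScan tab st.1 st.2 (findNotReached st.2)).2.2 hInv (by omega)
        -- the updated state is pointwise the abstract advance at the current minimum
        have hpt : ∀ j, j < tab.length →
            pvCols upd j = pvCols (stepSt tab st (curMin tab st)) j := by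
          intro j hj
          rw [pvCols_stepSt tab st (curMin tab st) j hj]
          rw [(hupt j hj).1]
          unfold pvAdv
          by_cases hc : pvActb st j = true ∧ pvValAt tab st j = curMin tab st
          · rw [if_pos hc]
            have hjC : j ∈ pvC tab st := (pvMem_pvC tab st j).mpr ⟨hj, hc.1⟩
            have hle : am ≤ j := hfirst j hjC (by rw [hc.2, hm])
            rw [if_pos ⟨hle, hc.1, by rw [hc.2, hdv]⟩]
          · rw [if_neg hc]
            rw [if_neg (fun hcon => hc ⟨hcon.2.1, by rw [hcon.2.2, hdv]⟩)]
        have hinvU : InvA tab upd := by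
          refine ⟨hu1, hu2, ?_⟩
          intro j hj
          constructor
          · rw [hpt j hj]
            exact ((pvInv_stepSt tab st (curMin tab st) hInv).2.2 j hj).1
          · exact (hupt j hj).2
        have hmeasU : measA tab upd < measA tab st := by
          rw [pvMeasA_congr tab upd (stepSt tab st (curMin tab st)) hpt]
          exact pvMeas_stepSt_lt tab st (curMin tab st) hInv
            (pvCurMin_attained tab st hInv hneF)
        have hfrU : frontsOf tab upd = frontsOf tab (stepSt tab st (curMin tab st)) :=
          pvFrontsOf_congr tab upd (stepSt tab st (curMin tab st)) hpt
        obtain ⟨ih1, ih2, ih3, ih4⟩ := ih am upd hinvU (by omega)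
        refine ⟨ih1, by omega, ?_, ih4⟩
        intro fB out hfB
        obtain ⟨fB', rfl⟩ : ∃ k, fB = k + 1 := ⟨fB - 1, by omega⟩
        rw [pvAltRound tab st out fB' hInv hneF]
        have hcount : (pvValsOf tab st).count (curMin tab st) ≠ 1 := by
          rw [pvCount_vals tab st hInv, hm]
          rw [huf] at hcnt
          exact of_decide_eq_false hcnt.symm
        rw [if_neg hcount]
        rw [← hfrU]
        exact ih3 fB' out (by omega)


theorem pvSingletonsLoop_succ (tab : List (List Int)) (fuel : Nat)
    (st : List Nat × List Bool) (tab2 : List Int) (idx : Nat) :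
    singletonsLoop tab (fuel + 1) st tab2 idx =
      if everyReachedEnd (findMinIndex tab st).2.2 then tab2
      else singletonsLoop tab fuel
        ((findMinIndex tab st).2.1.set (findMinIndex tab st).1
            ((findMinIndex tab st).2.1.getD (findMinIndex tab st).1 0 + 1),
         if (findMinIndex tab st).2.1.getD (findMinIndex tab st).1 0 + 1 =
             ((findMinIndex tab st).2.1.set (findMinIndex tab st).1
               ((findMinIndex tab st).2.1.getD (findMinIndex tab st).1 0 + 1)).length
         then (findMinIndex tab st).2.2.set (findMinIndex tab st).1 true
         else (findMinIndex tab st).2.2)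
        (tab2.set idx (pvVal tab (findMinIndex tab st).1
          ((findMinIndex tab st).2.1.getD (findMinIndex tab st).1 0)))
        (idx + 1) := rfl

theorem pvPad_set (out : List Int) (v : Int) (k : Nat) (hk : 1 ≤ k) :
    (out ++ List.replicate k (0 : Int)).set out.length v =
      (out ++ [v]) ++ List.replicate (k - 1) (0 : Int) := by
  obtain ⟨k', rfl⟩ : ∃ k', k = k' + 1 := ⟨k - 1, by omega⟩
  rw [List.set_append]
  simp [List.replicate_succ]

-- the main simulation: A's outer loop against the round loop, with the zero padding threaded
theorem pvMain (tab : List (List Int)) :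
    ∀ (fuel : Nat) (st : List Nat × List Bool) (out : List Int), InvA tab st →
    measA tab st + 1 ≤ fuel →
    out.length + measA tab st ≤ tab.length * tab.length →
    singletonsLoop tab fuel st
        (out ++ List.replicate (tab.length * tab.length - out.length) 0) out.length
      = pvRoundLoop tab tab.length (measA tab st + 1) (frontsOf tab st) out ++
        List.replicate (tab.length * tab.length -
          (pvRoundLoop tab tab.length (measA tab st + 1) (frontsOf tab st) out).length) 0 := by
  intro fuel
  induction fuel with
  | zero =>
    intro st out hInv hf hlen
    omega
  | succ f ih =>
    intro st out hInv hf hlen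
    obtain ⟨hInvR, hmeasR, hB, hemit⟩ := pvFmi_spec tab (tab.length * tab.length + 1) 0 st
      hInv (by have := pvMeas_le tab st; omega)
    rw [pvSingletonsLoop_succ]
    have hFM : findMinIndex tab st = fmiLoop tab (tab.length * tab.length + 1) false 0 st :=
      rfl
    rw [hFM]
    set r := fmiLoop tab (tab.length * tab.length + 1) false 0 st with hr
    by_cases hev : everyReachedEnd r.2.2 = true
    · rw [if_pos hev]
      have hnil : frontsOf tab r.2 = [] :=
        (pvFronts_nil_iff tab r.2).mpr ((pvEvery_true_iff tab r.2 hInvR).mp hev)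
      have hBv := hB (measA tab st + 1) out le_rfl
      rw [hBv, pvRoundLoop_succ, if_pos (by rw [hnil]; rfl)]
    · have hev' : everyReachedEnd r.2.2 = false := by simpa using hev
      rw [if_neg hev]
      obtain ⟨hlt, hact, hval, hcount, huniq⟩ := hemit hev'
      obtain ⟨hneF2, hmeas2⟩ := pvNotAll tab r.2 hInvR hev'
      -- the successor state of A's emit step
      set stE := (r.2.1.set r.1 (r.2.1.getD r.1 0 + 1),
        if r.2.1.getD r.1 0 + 1 = (r.2.1.set r.1 (r.2.1.getD r.1 0 + 1)).length
        then r.2.2.set r.1 true else r.2.2) with hstE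
      have hlen1 : r.2.1.length = tab.length := hInvR.1
      have hlen2 : r.2.2.length = tab.length := hInvR.2.1
      have hsetlen : (r.2.1.set r.1 (r.2.1.getD r.1 0 + 1)).length = tab.length := by
        simp [hlen1]
      have hcne : pvCols r.2 r.1 ≠ tab.length :=
        (pvActb_iff tab r.2 hInvR r.1 hlt).mp hact
      have hcle : pvCols r.2 r.1 ≤ tab.length := (hInvR.2.2 r.1 hlt).1
      -- pointwise: the emit step is the abstract advance at the (unique) minimum
      have hptE : ∀ j, j < tab.length →
          pvCols stE j = pvCols (stepSt tab r.2 (curMin tab r.2)) j := by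
        intro j hj
        rw [pvCols_stepSt tab r.2 (curMin tab r.2) j hj]
        by_cases hje : j = r.1
        · rw [hje]
          have h1 : pvCols stE r.1 = pvCols r.2 r.1 + 1 := by
            rw [hstE]
            unfold pvCols
            exact pvGetD_set_self _ _ _ (by omega)
          rw [h1]
          unfold pvAdv
          rw [if_pos ⟨hact, hval⟩]
        · have h1 : pvCols stE j = pvCols r.2 j := by
            rw [hstE]
            unfold pvCols
            exact pvGetD_set_ne _ _ _ (fun h => hje h.symm)
          rw [h1]
          unfold pvAdv
          rw [if_neg (fun hcon => hje (huniq j hj hcon.1 hcon.2))]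
      have hInvE : InvA tab stE := by
        refine ⟨by rw [hstE]; simpa using hlen1, ?_, ?_⟩
        · rw [hstE]
          dsimp only
          split_ifs <;> simp [hlen2]
        · intro j hj
          constructor
          · rw [hptE j hj]
            exact ((pvInv_stepSt tab r.2 (curMin tab r.2) hInvR).2.2 j hj).1
          · by_cases hje : j = r.1
            · rw [hje]
              have hcolsE : pvCols stE r.1 = pvCols r.2 r.1 + 1 := by
                rw [hstE]; unfold pvCols
                exact pvGetD_set_self _ _ _ (by omega)
              rw [hcolsE, hstE]
              dsimp only
              by_cases hc : r.2.1.getD r.1 0 + 1 = (r.2.1.set r.1 (r.2.1.getD r.1 0 + 1)).length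
              · rw [if_pos hc]
                rw [pvGetD_set_self _ _ _ (by omega)]
                rw [hsetlen] at hc
                exact (decide_eq_true hc).symm
              · rw [if_neg hc]
                rw [hsetlen] at hc
                have := (hInvR.2.2 r.1 hlt).2
                rw [this]
                have hc' : pvCols r.2 r.1 + 1 ≠ tab.length := hc
                rw [decide_eq_false hcne, decide_eq_false hc']
            · have hcolsE : pvCols stE j = pvCols r.2 j := by
                rw [hstE]; unfold pvCols
                exact pvGetD_set_ne _ _ _ (fun h => hje h.symm)
              have hreachE : stE.2.getD j false = r.2.2.getD j false := by
                rw [hstE]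
                dsimp only
                split_ifs
                · exact pvGetD_set_ne _ _ _ (fun h => hje h.symm)
                · rfl
              rw [hcolsE, hreachE]
              exact (hInvR.2.2 j hj).2
      have hmeasE : measA tab stE < measA tab r.2 := by
        rw [pvMeasA_congr tab stE (stepSt tab r.2 (curMin tab r.2)) hptE]
        exact pvMeas_stepSt_lt tab r.2 (curMin tab r.2) hInvR ⟨r.1, hlt, hact, hval⟩
      have hfrE : frontsOf tab stE = frontsOf tab (stepSt tab r.2 (curMin tab r.2)) :=
        pvFrontsOf_congr tab stE (stepSt tab r.2 (curMin tab r.2)) hptE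
      -- the emitted value
      have hvV : pvVal tab r.1 (r.2.1.getD r.1 0) = curMin tab r.2 := hval
      -- rewrite A's written output cell
      have hk1 : 1 ≤ tab.length * tab.length - out.length := by omega
      have hpad := pvPad_set out (curMin tab r.2) (tab.length * tab.length - out.length) hk1
      rw [hvV, hpad]
      have hout1 : (out ++ [curMin tab r.2]).length = out.length + 1 := by simp
      have hrep : tab.length * tab.length - out.length - 1 =
          tab.length * tab.length - (out ++ [curMin tab r.2]).length := by
        simp; omega
      rw [hrep, ← hout1]
      -- apply the induction hypothesis at the successor state
      have hIH := ih stE (out ++ [curMin tab r.2]) hInvE (by omega) (by rw [hout1]; omega)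
      rw [hIH]
      -- the round loop makes the same (emitting) round
      have hBeq : pvRoundLoop tab tab.length (measA tab st + 1) (frontsOf tab st) out =
          pvRoundLoop tab tab.length (measA tab stE + 1) (frontsOf tab stE)
            (out ++ [curMin tab r.2]) := by
        rw [hB (measA tab st + 1) out le_rfl]
        obtain ⟨μ', hμ'⟩ : ∃ k, measA tab r.2 = k + 1 := ⟨measA tab r.2 - 1, by omega⟩
        rw [hμ']
        rw [pvAltRound tab r.2 out (μ' + 1) hInvR hneF2]
        rw [if_pos hcount]
        rw [← hfrE]
        exact pvRoundLoop_fuel tab (measA tab stE) (μ' + 1) (measA tab stE + 1) stE _ hInvE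
          le_rfl (by omega) le_rfl
      rw [hBeq]

-- ===================================================================
-- B-side lemmas: the sorted suffix queue simulates the same round loop
-- ===================================================================

-- the remaining suffix of row i from column c (rows truncated to the first n columns)
def pvSfx (tab : List (List Int)) (p : Nat × Nat) : List Int :=
  ((tab.getD p.1 []).take tab.length).drop p.2

theorem pyListLt_irrefl : ∀ a, pyListLt a a = false := by
  intro a
  induction a with
  | nil => rfl
  | cons x xs ih => simp [pyListLt, ih]

theorem pyListLt_trans : ∀ a b c, pyListLt a b = true → pyListLt b c = true →
    pyListLt a c = true := by
  intro a
  induction a with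
  | nil =>
    intro b c hab hbc
    cases b with
    | nil => exact absurd hab (by simp [pyListLt])
    | cons y ys =>
      cases c with
      | nil => exact absurd hbc (by simp [pyListLt])
      | cons z zs => simp [pyListLt]
  | cons x xs ih =>
    intro b c hab hbc
    cases b with
    | nil => exact absurd hab (by simp [pyListLt])
    | cons y ys =>
      cases c with
      | nil => exact absurd hbc (by simp [pyListLt])
      | cons z zs =>
        simp only [pyListLt] at hab hbc ⊢
        by_cases h1 : x < y
        · -- x < y; from hbc, y ≤ z, so x < z
          by_cases h2 : y < z
          · rw [if_pos (by omega)]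
          · rw [if_neg h2] at hbc
            by_cases h3 : z < y
            · rw [if_pos h3] at hbc; exact absurd hbc (by simp)
            · rw [if_pos (by omega)]
        · rw [if_neg h1] at hab
          by_cases h1' : y < x
          · rw [if_pos h1'] at hab; exact absurd hab (by simp)
          · rw [if_neg h1'] at hab
            have hxy : x = y := by omega
            by_cases h2 : y < z
            · rw [if_pos (by omega)]
            · rw [if_neg h2] at hbc
              by_cases h3 : z < y
              · rw [if_pos h3] at hbc; exact absurd hbc (by simp)
              · rw [if_neg h3] at hbc
                rw [if_neg (by omega), if_neg (by omega)]
                exact ih ys zs hab hbc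

theorem pyListLt_total : ∀ a b, pyListLt a b = false → pyListLt b a = true ∨ a = b := by
  intro a
  induction a with
  | nil =>
    intro b hab
    cases b with
    | nil => right; rfl
    | cons y ys => exact absurd hab (by simp [pyListLt])
  | cons x xs ih =>
    intro b hab
    cases b with
    | nil => left; simp [pyListLt]
    | cons y ys =>
      simp only [pyListLt] at hab ⊢
      by_cases h1 : x < y
      · rw [if_pos h1] at hab; exact absurd hab (by simp)
      · rw [if_neg h1] at hab
        by_cases h2 : y < x
        · left; rw [if_pos h2]
        · rw [if_neg h2] at hab
          have hxy : x = y := by omega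
          rcases ih ys hab with h | h
          · left; rw [if_neg (by omega), if_neg (by omega)]; exact h
          · right; rw [hxy, h]

theorem pyListLt_asymm {a b : List Int} (h : pyListLt a b = true) :
    pyListLt b a = false := by
  by_contra hc
  have hba : pyListLt b a = true := by simpa using hc
  have := pyListLt_trans a b a h hba
  rw [pyListLt_irrefl] at this
  cases this

-- a ≤ c (¬ c<a) and c < t give a < t
theorem pyListLt_le_lt {a c t : List Int} (h1 : pyListLt c a = false)
    (h2 : pyListLt c t = true) : pyListLt a t = true := by
  rcases pyListLt_total c a h1 with h | h
  · exact pyListLt_trans a c t h h2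
  · rw [← h]; exact h2
    
-- c ≥ t (¬ c<t) and j ≥ c give ¬ j < t
theorem pyListLt_ge_ge {c t j : List Int} (h1 : pyListLt c t = false)
    (h2 : pyListLt j c = false) : pyListLt j t = false := by
  by_contra hc
  have hjt : pyListLt j t = true := by simpa using hc
  rcases pyListLt_total c t h1 with h | h
  · have := pyListLt_trans j t c hjt h
    rw [h2] at this; cases this
  · rw [← h] at hjt
    rw [h2] at hjt; cases hjt

-- heads of lex-comparable nonempty lists
theorem pyHead_le {x y : List Int} (hxy : pyListLt y x = false) (hx : x ≠ []) (hy : y ≠ []) :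
    x.headD 0 ≤ y.headD 0 := by
  cases x with
  | nil => exact absurd rfl hx
  | cons a as_ =>
    cases y with
    | nil => exact absurd rfl hy
    | cons b bs =>
      simp only [pyListLt] at hxy
      split_ifs at hxy <;> simp_all <;> omega

-- sortedness predicate of the queue
def pvSorted (l : List (List Int)) : Prop :=
  l.Pairwise (fun a b => pyListLt b a = false)

theorem pvSorted_getD {l : List (List Int)} (hs : pvSorted l) {i j : Nat}
    (hij : i ≤ j) (hj : j < l.length) :
    pyListLt (l.getD j []) (l.getD i []) = false := by
  rcases Nat.eq_or_lt_of_le hij with rfl | hlt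
  · exact pyListLt_irrefl _
  · have h := List.pairwise_iff_getElem.mp hs i j (by omega) hj hlt
    rw [List.getD_eq_getElem l [] (by omega : i < l.length), List.getD_eq_getElem l [] hj]
    exact h

-- the binary search finds the first position whose element is not < t
theorem pvInsPos_spec (heap : List (List Int)) (t : List Int) (hs : pvSorted heap) :
    ∀ k lo hi, hi - lo ≤ k → lo ≤ hi → hi ≤ heap.length →
    (∀ j, j < lo → pyListLt (heap.getD j []) t = true) →
    (∀ j, hi ≤ j → j < heap.length → pyListLt (heap.getD j []) t = false) →
    lo ≤ pvInsPos heap t k lo hi ∧ pvInsPos heap t k lo hi ≤ hi ∧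
    (∀ j, j < pvInsPos heap t k lo hi → pyListLt (heap.getD j []) t = true) ∧
    (∀ j, pvInsPos heap t k lo hi ≤ j → j < heap.length →
      pyListLt (heap.getD j []) t = false) := by
  intro k
  induction k with
  | zero =>
    intro lo hi hk hlh hhl hlow hhigh
    have : lo = hi := by omega
    subst this
    exact ⟨le_rfl, le_rfl, hlow, fun j hj hjl => hhigh j hj hjl⟩
  | succ k ih =>
    intro lo hi hk hlh hhl hlow hhigh
    have hunf : pvInsPos heap t (k + 1) lo hi =
        if lo < hi then
          (if pyListLt (heap.getD ((lo + hi) / 2) []) t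
           then pvInsPos heap t k ((lo + hi) / 2 + 1) hi
           else pvInsPos heap t k lo ((lo + hi) / 2)) else lo := rfl
    rw [hunf]
    by_cases h1 : lo < hi
    · rw [if_pos h1]
      have hmlo : lo ≤ (lo + hi) / 2 := by omega
      have hmhi : (lo + hi) / 2 < hi := by omega
      by_cases h2 : pyListLt (heap.getD ((lo + hi) / 2) []) t = true
      · rw [if_pos h2]
        have hlow' : ∀ j, j < (lo + hi) / 2 + 1 → pyListLt (heap.getD j []) t = true := by
          intro j hj
          by_cases hjlo : j < lo
          · exact hlow j hjlo
          · have hle := pvSorted_getD hs (show j ≤ (lo + hi) / 2 by omega)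
              (show (lo + hi) / 2 < heap.length by omega)
            exact pyListLt_le_lt hle h2
        obtain ⟨r1, r2, r3, r4⟩ := ih ((lo + hi) / 2 + 1) hi (by omega) (by omega) hhl
          hlow' hhigh
        exact ⟨by omega, r2, r3, r4⟩
      · rw [if_neg h2]
        have h2' : pyListLt (heap.getD ((lo + hi) / 2) []) t = false := by simpa using h2
        have hhigh' : ∀ j, (lo + hi) / 2 ≤ j → j < heap.length →
            pyListLt (heap.getD j []) t = false := by
          intro j hj hjl
          have hle := pvSorted_getD hs hj hjl
          exact pyListLt_ge_ge h2' hle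
        obtain ⟨r1, r2, r3, r4⟩ := ih lo ((lo + hi) / 2) (by omega) (by omega) (by omega)
          hlow hhigh'
        exact ⟨r1, by omega, r3, r4⟩
    · rw [if_neg h1]
      have : lo = hi := by omega
      subst this
      exact ⟨le_rfl, le_rfl, hlow, fun j hj hjl => hhigh j hj hjl⟩

-- inserting t at a position that splits "< t" from "≥ t" keeps the list sorted
theorem pvPairwise_insertIdx (t : List Int) :
    ∀ (l : List (List Int)) (p : Nat), pvSorted l → p ≤ l.length →
    (∀ j, j < p → pyListLt (l.getD j []) t = true) →
    (∀ j, p ≤ j → j < l.length → pyListLt (l.getD j []) t = false) →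
    pvSorted (l.insertIdx p t) := by
  intro l
  induction l with
  | nil =>
    intro p _ hp _ _
    have : p = 0 := by simpa using hp
    subst this
    exact List.pairwise_singleton _ _
  | cons a l ih =>
    intro p hs hp hlow hhigh
    cases p with
    | zero =>
      rw [List.insertIdx_zero]
      refine List.Pairwise.cons ?_ hs
      intro b hb
      obtain ⟨j, hj, rfl⟩ := List.getElem_of_mem hb
      have := hhigh j (by omega) (by simpa using hj)
      rwa [List.getD_eq_getElem _ [] (by simpa using hj)] at this
    | succ p =>
      rw [List.insertIdx_succ_cons]
      obtain ⟨hhead, htail⟩ := List.pairwise_cons.mp hs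
      have hp' : p ≤ l.length := by simpa using hp
      refine List.Pairwise.cons ?_ ?_
      · intro b hb
        rcases (List.mem_insertIdx hp').mp hb with rfl | hbl
        · have := hlow 0 (by omega)
          rw [List.getD_cons_zero] at this
          exact pyListLt_asymm this
        · exact hhead b hbl
      · refine ih p htail hp' ?_ ?_
        · intro j hj
          have := hlow (j + 1) (by omega)
          rwa [List.getD_cons_succ] at this
        · intro j hj hjl
          have := hhigh (j + 1) (by omega) (by simpa using hjl)
          rwa [List.getD_cons_succ] at this

theorem pvInsert_spec (heap : List (List Int)) (t : List Int) (hs : pvSorted heap) :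
    pvSorted (pvInsert heap t) ∧ List.Perm (pvInsert heap t) (t :: heap) := by
  obtain ⟨r1, r2, r3, r4⟩ := pvInsPos_spec heap t hs heap.length 0 heap.length
    (by omega) (by omega) le_rfl (by omega) (by omega)
  unfold pvInsert
  exact ⟨pvPairwise_insertIdx t heap _ hs r2 r3 r4,
    List.perm_insertIdx t heap r2⟩

-- pop of the leading run, explicitly
theorem pvPopRun_eq (m : Int) (l : List (List Int)) :
    pvPopRun m l = ((l.takeWhile (fun s => s.headD 0 == m)).map List.tail,
      l.dropWhile (fun s => s.headD 0 == m)) := by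
  induction l with
  | nil => rfl
  | cons s hs ih =>
    by_cases h : s.headD 0 = m
    · have h' : s.head?.getD 0 = m := by simpa using h
      simp [pvPopRun, h', ih, List.takeWhile_cons, List.dropWhile_cons]
    · have h' : ¬ s.head?.getD 0 = m := by simpa using h
      simp [pvPopRun, h', List.takeWhile_cons, List.dropWhile_cons]

-- in a sorted queue whose heads are all ≥ m, the leading run of head-m elements is ALL of them
theorem pvRun_split (m : Int) :
    ∀ l : List (List Int), pvSorted l → (∀ x ∈ l, x ≠ []) →
    (∀ x ∈ l, m ≤ x.headD 0) →
    l.takeWhile (fun s => s.headD 0 == m) = l.filter (fun s => s.headD 0 == m) ∧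
    l.dropWhile (fun s => s.headD 0 == m) = l.filter (fun s => !(s.headD 0 == m)) := by
  intro l
  induction l with
  | nil => exact fun _ _ _ => ⟨rfl, rfl⟩
  | cons a l ih =>
    intro hs hne hge
    obtain ⟨hhead, htail⟩ := List.pairwise_cons.mp hs
    by_cases h : a.headD 0 = m
    · obtain ⟨ih1, ih2⟩ := ih htail (fun x hx => hne x (List.mem_cons_of_mem _ hx))
        (fun x hx => hge x (List.mem_cons_of_mem _ hx))
      have hpa : (a.headD 0 == m) = true := by simpa using h
      constructor
      · rw [List.takeWhile_cons, List.filter_cons]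
        rw [if_pos hpa, if_pos hpa, ih1]
      · rw [List.dropWhile_cons, List.filter_cons]
        rw [if_pos hpa, if_neg (by rw [hpa]; decide), ih2]
    · -- every later element has head > m, so none matches
      have hgt : m < a.headD 0 := by
        have := hge a (List.mem_cons_self)
        omega
      have hnone : ∀ x ∈ l, ¬ x.headD 0 = m := by
        intro x hx hxm
        have hle := pyHead_le (hhead x hx) (hne a (List.mem_cons_self))
          (hne x (List.mem_cons_of_mem _ hx))
        omega
      have hfilter : l.filter (fun s => s.headD 0 == m) = [] := by
        apply List.filter_eq_nil_iff.mpr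
        intro x hx
        simpa using hnone x hx
      have hfilter' : l.filter (fun s => !(s.headD 0 == m)) = l := by
        apply List.filter_eq_self.mpr
        intro x hx
        simpa using hnone x hx
      have hpa : (a.headD 0 == m) = false := by simpa using h
      constructor
      · rw [List.takeWhile_cons, List.filter_cons]
        rw [if_neg (by rw [hpa]; decide), if_neg (by rw [hpa]; decide), hfilter]
      · rw [List.dropWhile_cons, List.filter_cons]
        rw [if_neg (by rw [hpa]; decide), if_pos (by rw [hpa]; rfl), hfilter']

-- inserting the tails (skipping empty ones) keeps the queue sorted; multiset bookkeeping
theorem pvFoldIns_spec (ts : List (List Int)) :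
    ∀ h : List (List Int), pvSorted h →
    pvSorted (ts.foldl (fun h t => if t.isEmpty then h else pvInsert h t) h) ∧
    List.Perm (ts.foldl (fun h t => if t.isEmpty then h else pvInsert h t) h)
      (h ++ ts.filter (fun t => !t.isEmpty)) := by
  induction ts with
  | nil => exact fun h hs => ⟨hs, by simp⟩
  | cons t ts ih =>
    intro h hs
    rw [List.foldl_cons, List.filter_cons]
    by_cases ht : t.isEmpty
    · rw [if_pos ht, if_neg (by simp [ht])]
      exact ih h hs
    · have ht' : t.isEmpty = false := by simpa using ht
      rw [if_neg (by simp [ht']), if_pos (by simp [ht'])]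
      obtain ⟨hins, hperm⟩ := pvInsert_spec h t hs
      obtain ⟨ih1, ih2⟩ := ih (pvInsert h t) hins
      refine ⟨ih1, ih2.trans ((hperm.append_right _).trans ?_)⟩
      show List.Perm (t :: (h ++ ts.filter (fun t => !t.isEmpty)))
        (h ++ t :: ts.filter (fun t => !t.isEmpty))
      exact List.perm_middle.symm

-- facts about the suffix of a front of an admitted state
theorem pvSfx_spec (tab : List (List Int)) (st : List Nat × List Bool)
    (hPre : Pre_singletons tab) (hInv : InvA tab st) :
    ∀ p ∈ frontsOf tab st,
      p.2 < tab.length ∧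
      pvSfx tab p ≠ [] ∧
      (pvSfx tab p).headD 0 = pvVal tab p.1 p.2 ∧
      (pvSfx tab p).tail = pvSfx tab (p.1, p.2 + 1) ∧
      (pvSfx tab (p.1, p.2 + 1) = [] ↔ p.2 + 1 = tab.length) := by
  intro p hp
  obtain ⟨j, hj, hsome⟩ := List.mem_filterMap.mp hp
  have hjlt : j < tab.length := List.mem_range.mp hj
  by_cases hc : pvCols st j = tab.length
  · rw [if_pos hc] at hsome; cases hsome
  · rw [if_neg hc] at hsome
    obtain ⟨p1, p2⟩ := p
    obtain ⟨rfl, rfl⟩ : j = p1 ∧ pvCols st j = p2 := by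
      cases hsome; exact ⟨rfl, rfl⟩
    simp only at *
    have hclt : pvCols st j < tab.length := by
      have := (hInv.2.2 j hjlt).1; omega
    have hrow : tab.length ≤ (tab.getD j []).length := by
      apply hPre
      rw [List.getD_eq_getElem tab [] hjlt]
      exact List.getElem_mem hjlt
    set row := tab.getD j [] with hrowdef
    have htlen : (row.take tab.length).length = tab.length := by
      simp; omega
    have hcons : (row.take tab.length).drop (pvCols st j) =
        (row.take tab.length)[pvCols st j] ::
          (row.take tab.length).drop (pvCols st j + 1) :=
      List.drop_eq_getElem_cons (by omega)
    have hsfx : pvSfx tab (j, pvCols st j) =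
        (row.take tab.length).drop (pvCols st j) := rfl
    have hsfx1 : pvSfx tab (j, pvCols st j + 1) =
        (row.take tab.length).drop (pvCols st j + 1) := rfl
    refine ⟨hclt, ?_, ?_, ?_, ?_⟩
    · rw [hsfx, hcons]; exact List.cons_ne_nil _ _
    · rw [hsfx, hcons]
      show (row.take tab.length)[pvCols st j]'(by omega) = pvVal tab j (pvCols st j)
      rw [List.getElem_take]
      unfold pvVal
      rw [← hrowdef, List.getD_eq_getElem row 0 (by omega)]
    · rw [hsfx, hsfx1, hcons]; rfl
    · rw [hsfx1, List.drop_eq_nil_iff, htlen]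
      omega

-- one perm-split of filterMap along a boolean test
theorem pvFilterMap_split {α β : Type} (q : α → Bool) (h : α → Option β) (l : List α) :
    List.Perm (l.filterMap h)
      ((l.filter q).filterMap h ++ (l.filter (fun x => !q x)).filterMap h) := by
  induction l with
  | nil => simp
  | cons a l ih =>
    by_cases hq : q a
    · rw [List.filterMap_cons, List.filter_cons_of_pos hq,
        List.filter_cons_of_neg (by simp [hq]), List.filterMap_cons]
      cases hha : h a with
      | none => exact ih
      | some b => exact ih.cons b
    · rw [List.filterMap_cons, List.filter_cons_of_neg hq,
        List.filter_cons_of_pos (by simp [hq]), List.filterMap_cons]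
      cases hha : h a with
      | none => exact ih
      | some b => exact (ih.cons b).trans List.perm_middle.symm

theorem pvBLoop_succ (f : Nat) (heap : List (List Int)) (out : List Int) :
    pvBLoop (f + 1) heap out =
      if heap.isEmpty then out
      else pvBLoop f
        ((pvPopRun ((heap.headD []).headD 0) heap).1.foldl
          (fun h t => if t.isEmpty then h else pvInsert h t)
          (pvPopRun ((heap.headD []).headD 0) heap).2)
        (if (pvPopRun ((heap.headD []).headD 0) heap).1.length = 1
         then out ++ [(heap.headD []).headD 0] else out) := rfl

theorem pvZipSelf {α β : Type} (l : List α) (f : α → β) :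
    l.zip (l.map f) = l.map (fun x => (x, f x)) := by
  induction l with
  | nil => rfl
  | cons a t ih => simp [ih]

theorem pvFilterMap_ifP {α β : Type} (P : α → Prop) [DecidablePred P] (g : α → β)
    (l : List α) :
    l.filterMap (fun j => if P j then some (g j) else none) =
      (l.filter (fun j => decide (P j))).map g := by
  induction l with
  | nil => rfl
  | cons a t ih => by_cases h : P a <;> simp [List.filterMap_cons, List.filter_cons, h, ih]

theorem pvFilterMap_some {α β : Type} (g : α → β) (l : List α) :
    l.filterMap (fun x => some (g x)) = l.map g := by
  induction l with
  | nil => rfl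
  | cons a t ih => simp [List.filterMap_cons, ih]

-- the bridge: the sorted-queue loop of B computes the round loop
theorem pvBridge (tab : List (List Int)) (hPre : Pre_singletons tab) :
    ∀ (μ fuel : Nat) (st : List Nat × List Bool) (heap : List (List Int)) (out : List Int),
    InvA tab st → measA tab st ≤ μ → measA tab st + 1 ≤ fuel →
    pvSorted heap → List.Perm heap ((frontsOf tab st).map (pvSfx tab)) →
    pvBLoop fuel heap out = pvRoundLoop tab tab.length fuel (frontsOf tab st) out := by
  intro μ
  induction μ with
  | zero =>
    intro fuel st heap out hInv hμ hf hS hP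
    have hnil : frontsOf tab st = [] :=
      (pvFronts_nil_iff tab st).mpr ((pvMeas_zero_iff tab st hInv).mp (by omega))
    have hheap : heap = [] := by
      have h0 : List.Perm heap [] := by simpa [hnil] using hP
      exact h0.eq_nil
    obtain ⟨f, rfl⟩ : ∃ k, fuel = k + 1 := ⟨fuel - 1, by omega⟩
    rw [hheap, pvRoundLoop_succ, if_pos (by rw [hnil]; rfl)]
    rfl
  | succ μ ih =>
    intro fuel st heap out hInv hμ hf hS hP
    by_cases hnil : frontsOf tab st = []
    · have hheap : heap = [] := by
        have h0 : List.Perm heap [] := by simpa [hnil] using hP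
        exact h0.eq_nil
      obtain ⟨f, rfl⟩ : ∃ k, fuel = k + 1 := ⟨fuel - 1, by omega⟩
      rw [hheap, pvRoundLoop_succ, if_pos (by rw [hnil]; rfl)]
      rfl
    · obtain ⟨f, rfl⟩ : ∃ k, fuel = k + 1 := ⟨fuel - 1, by omega⟩
      have hfacts := pvSfx_spec tab st hPre hInv
      have hSne : ∀ x ∈ (frontsOf tab st).map (pvSfx tab), x ≠ [] := by
        intro x hx
        obtain ⟨p, hpF, rfl⟩ := List.mem_map.mp hx
        exact (hfacts p hpF).2.1
      have hne_elems : ∀ x ∈ heap, x ≠ [] := fun x hx => hSne x (hP.subset hx)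
      have hheapne : heap ≠ [] := by
        intro h0
        rw [h0] at hP
        exact hnil (List.map_eq_nil_iff.mp hP.symm.eq_nil)
      have hvals : pvValsOf tab st =
          (frontsOf tab st).map (fun p => pvVal tab p.1 p.2) := rfl
      have hheadmap : ((frontsOf tab st).map (pvSfx tab)).map (fun s => s.headD 0) =
          pvValsOf tab st := by
        rw [hvals, List.map_map]
        exact List.map_congr_left (fun p hp => (hfacts p hp).2.2.1)
      have hheads : List.Perm (heap.map (fun s => s.headD 0)) (pvValsOf tab st) := by
        have h := hP.map (fun s => s.headD 0)
        rwa [hheadmap] at h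
      have hvalsne : pvValsOf tab st ≠ [] := by
        rw [hvals]
        exact fun hcon => hnil (List.map_eq_nil_iff.mp hcon)
      obtain ⟨v, hvmin⟩ : ∃ v, PySem.List.min? (pvValsOf tab st) (fun x => x) = some v := by
        cases hmin0 : PySem.List.min? (pvValsOf tab st) (fun x => x) with
        | none =>
          rw [PySem.List.min?_eq_none_iff] at hmin0
          exact absurd hmin0 hvalsne
        | some v => exact ⟨v, rfl⟩
      have hvle := PySem.List.min?_isMin hvmin
      have hvmem := PySem.List.min?_mem hvmin
      obtain ⟨h0, hs0, hheapeq⟩ := List.exists_cons_of_ne_nil hheapne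
      have hm0 : (heap.headD []).headD 0 = h0.headD 0 := by rw [hheapeq]; rfl
      have hmvals : (heap.headD []).headD 0 ∈ pvValsOf tab st := by
        apply hheads.subset
        rw [hm0, hheapeq]
        exact List.mem_map_of_mem (List.mem_cons_self)
      have hvlem : v ≤ (heap.headD []).headD 0 := hvle _ hmvals
      have hmlev : (heap.headD []).headD 0 ≤ v := by
        have hv' : v ∈ heap.map (fun s => s.headD 0) := hheads.symm.subset hvmem
        obtain ⟨x, hxheap, hxv⟩ := List.mem_map.mp hv'
        rw [hheapeq] at hxheap
        rcases List.mem_cons.mp hxheap with rfl | hxs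
        · rw [hm0, hxv]
        · have hpw := (List.pairwise_cons.mp (by rw [hheapeq] at hS; exact hS)).1 x hxs
          have hxne : x ≠ [] := hne_elems x (by rw [hheapeq]; exact List.mem_cons_of_mem _ hxs)
          have h0ne : h0 ≠ [] := hne_elems h0 (by rw [hheapeq]; exact List.mem_cons_self)
          rw [hm0, ← hxv]
          exact pyHead_le hpw h0ne hxne
      have hmv : (heap.headD []).headD 0 = v := le_antisymm hmlev hvlem
      have hcur : curMin tab st = (heap.headD []).headD 0 := by
        unfold curMin
        rw [hvmin, hmv]
        rfl
      -- the leading run is exactly the head-m elements, the remainder is m-free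
      have hge : ∀ x ∈ heap, (heap.headD []).headD 0 ≤ x.headD 0 := by
        intro x hx
        have hmem : x.headD 0 ∈ pvValsOf tab st := hheads.subset (List.mem_map_of_mem hx)
        have := hvle _ hmem
        omega
      obtain ⟨htake, hdrop⟩ :=
        pvRun_split ((heap.headD []).headD 0) heap hS hne_elems hge
      have hpop : pvPopRun ((heap.headD []).headD 0) heap =
          ((heap.filter (fun s => s.headD 0 == (heap.headD []).headD 0)).map List.tail,
           heap.filter (fun s => !(s.headD 0 == (heap.headD []).headD 0))) := by
        rw [pvPopRun_eq, htake, hdrop]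
      -- the two filtered halves of the queue, as fronts
      have hfilterP : List.Perm
          (heap.filter (fun s => s.headD 0 == (heap.headD []).headD 0))
          (((frontsOf tab st).filter
            (fun p => pvVal tab p.1 p.2 == (heap.headD []).headD 0)).map (pvSfx tab)) := by
        have h1 := hP.filter (fun s => s.headD 0 == (heap.headD []).headD 0)
        have h2 : (frontsOf tab st).filter
            ((fun s => s.headD 0 == (heap.headD []).headD 0) ∘ pvSfx tab) =
            (frontsOf tab st).filter
              (fun p => pvVal tab p.1 p.2 == (heap.headD []).headD 0) :=
          List.filter_congr (fun p hp => by
            simp only [Function.comp_apply]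
            rw [(hfacts p hp).2.2.1])
        rwa [List.filter_map, h2] at h1
      have hfilterN : List.Perm
          (heap.filter (fun s => !(s.headD 0 == (heap.headD []).headD 0)))
          (((frontsOf tab st).filter
            (fun p => !(pvVal tab p.1 p.2 == (heap.headD []).headD 0))).map (pvSfx tab)) := by
        have h1 := hP.filter (fun s => !(s.headD 0 == (heap.headD []).headD 0))
        have h2 : (frontsOf tab st).filter
            ((fun s => !(s.headD 0 == (heap.headD []).headD 0)) ∘ pvSfx tab) =
            (frontsOf tab st).filter
              (fun p => !(pvVal tab p.1 p.2 == (heap.headD []).headD 0)) :=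
          List.filter_congr (fun p hp => by
            simp only [Function.comp_apply]
            rw [(hfacts p hp).2.2.1])
        rwa [List.filter_map, h2] at h1
      have hrestsorted : pvSorted
          (heap.filter (fun s => !(s.headD 0 == (heap.headD []).headD 0))) :=
        hS.sublist List.filter_sublist
      -- the collected tails, as advanced fronts
      have htails : List.Perm
          ((heap.filter (fun s => s.headD 0 == (heap.headD []).headD 0)).map List.tail)
          (((frontsOf tab st).filter
              (fun p => pvVal tab p.1 p.2 == (heap.headD []).headD 0)).map
            (fun p => pvSfx tab (p.1, p.2 + 1))) := by
        have h1 := hfilterP.map List.tail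
        rw [List.map_map] at h1
        have h2 : ((frontsOf tab st).filter
            (fun p => pvVal tab p.1 p.2 == (heap.headD []).headD 0)).map
              (List.tail ∘ pvSfx tab) =
            ((frontsOf tab st).filter
              (fun p => pvVal tab p.1 p.2 == (heap.headD []).headD 0)).map
              (fun p => pvSfx tab (p.1, p.2 + 1)) :=
          List.map_congr_left (fun p hp =>
            (hfacts p (List.mem_of_mem_filter hp)).2.2.2.1)
        rwa [h2] at h1
      have htailsf : List.Perm
          (((heap.filter (fun s => s.headD 0 == (heap.headD []).headD 0)).map
            List.tail).filter (fun t => !t.isEmpty))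
          ((((frontsOf tab st).filter
              (fun p => pvVal tab p.1 p.2 == (heap.headD []).headD 0)).filter
              (fun p => decide (p.2 + 1 < tab.length))).map
            (fun p => pvSfx tab (p.1, p.2 + 1))) := by
        have h1 := htails.filter (fun t => !t.isEmpty)
        have h2 : ((frontsOf tab st).filter
              (fun p => pvVal tab p.1 p.2 == (heap.headD []).headD 0)).filter
              ((fun t => !t.isEmpty) ∘ (fun p => pvSfx tab (p.1, p.2 + 1))) =
            ((frontsOf tab st).filter
              (fun p => pvVal tab p.1 p.2 == (heap.headD []).headD 0)).filter
              (fun p => decide (p.2 + 1 < tab.length)) := by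
          refine List.filter_congr (fun p hp => ?_)
          have hpF := List.mem_of_mem_filter hp
          have h4 := (hfacts p hpF).2.2.2.2
          have h5 := (hfacts p hpF).1
          simp only [Function.comp_apply]
          by_cases hc : p.2 + 1 < tab.length
          · have hne' : ¬ (pvSfx tab (p.1, p.2 + 1) = []) := fun hcon => by
              have := h4.mp hcon
              omega
            simp [hc, List.isEmpty_iff, hne']
          · have heq' : pvSfx tab (p.1, p.2 + 1) = [] := h4.mpr (by omega)
            simp [hc, List.isEmpty_iff, heq']
        have h3 : (((frontsOf tab st).filter
              (fun p => pvVal tab p.1 p.2 == (heap.headD []).headD 0)).map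
              (fun p => pvSfx tab (p.1, p.2 + 1))).filter (fun t => !t.isEmpty) =
            (((frontsOf tab st).filter
              (fun p => pvVal tab p.1 p.2 == (heap.headD []).headD 0)).filter
              (fun p => decide (p.2 + 1 < tab.length))).map
              (fun p => pvSfx tab (p.1, p.2 + 1)) := by
          rw [List.filter_map, h2]
        rwa [h3] at h1
      -- the advanced fronts of the round loop, split into the two halves
      have hLHS0 : (frontsOf tab (stepSt tab st ((heap.headD []).headD 0))).map (pvSfx tab)
          = (frontsOf tab st).filterMap (fun p =>
              (if pvVal tab p.1 p.2 ≠ (heap.headD []).headD 0 ∨ p.2 + 1 < tab.length then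
                some (if pvVal tab p.1 p.2 = (heap.headD []).headD 0
                  then (p.1, p.2 + 1) else p)
               else none).map (pvSfx tab)) := by
        rw [← pvRebuild tab st ((heap.headD []).headD 0) hInv,
          pvZipSelf (frontsOf tab st) (fun p => pvVal tab p.1 p.2),
          List.filterMap_map, List.map_filterMap]
        rfl
      have hpieceM : ((frontsOf tab st).filter
            (fun p => pvVal tab p.1 p.2 == (heap.headD []).headD 0)).filterMap (fun p =>
              (if pvVal tab p.1 p.2 ≠ (heap.headD []).headD 0 ∨ p.2 + 1 < tab.length then
                some (if pvVal tab p.1 p.2 = (heap.headD []).headD 0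
                  then (p.1, p.2 + 1) else p)
               else none).map (pvSfx tab))
          = (((frontsOf tab st).filter
              (fun p => pvVal tab p.1 p.2 == (heap.headD []).headD 0)).filter
              (fun p => decide (p.2 + 1 < tab.length))).map
            (fun p => pvSfx tab (p.1, p.2 + 1)) := by
        rw [List.filterMap_congr (g := fun p =>
            if p.2 + 1 < tab.length then some (pvSfx tab (p.1, p.2 + 1)) else none)
          (fun p hp => ?_)]
        · exact pvFilterMap_ifP _ _ _
        · have hm' : pvVal tab p.1 p.2 = (heap.headD []).headD 0 := by
            simpa using List.of_mem_filter hp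
          show _ = if p.2 + 1 < tab.length then some (pvSfx tab (p.1, p.2 + 1)) else none
          by_cases hc : p.2 + 1 < tab.length
          · rw [if_pos (Or.inr hc), if_pos hm', if_pos hc]
            rfl
          · rw [if_neg (by push_neg; exact ⟨by simpa using hm', by omega⟩), if_neg hc]
            rfl
      have hpieceN : ((frontsOf tab st).filter
            (fun p => !(pvVal tab p.1 p.2 == (heap.headD []).headD 0))).filterMap (fun p =>
              (if pvVal tab p.1 p.2 ≠ (heap.headD []).headD 0 ∨ p.2 + 1 < tab.length then
                some (if pvVal tab p.1 p.2 = (heap.headD []).headD 0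
                  then (p.1, p.2 + 1) else p)
               else none).map (pvSfx tab))
          = ((frontsOf tab st).filter
              (fun p => !(pvVal tab p.1 p.2 == (heap.headD []).headD 0))).map (pvSfx tab) := by
        rw [List.filterMap_congr (g := fun p => some (pvSfx tab p)) (fun p hp => ?_)]
        · exact pvFilterMap_some _ _
        · have hm' : ¬ pvVal tab p.1 p.2 = (heap.headD []).headD 0 := by
            simpa using List.of_mem_filter hp
          show _ = some (pvSfx tab p)
          rw [if_pos (Or.inl hm'), if_neg hm']
          rfl
      have hLHSperm : List.Perm
          ((frontsOf tab (stepSt tab st ((heap.headD []).headD 0))).map (pvSfx tab))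
          ((((frontsOf tab st).filter
              (fun p => pvVal tab p.1 p.2 == (heap.headD []).headD 0)).filter
              (fun p => decide (p.2 + 1 < tab.length))).map
              (fun p => pvSfx tab (p.1, p.2 + 1)) ++
            ((frontsOf tab st).filter
              (fun p => !(pvVal tab p.1 p.2 == (heap.headD []).headD 0))).map (pvSfx tab)) := by
        rw [hLHS0]
        have h := pvFilterMap_split
          (fun p => pvVal tab p.1 p.2 == (heap.headD []).headD 0)
          (fun p =>
            (if pvVal tab p.1 p.2 ≠ (heap.headD []).headD 0 ∨ p.2 + 1 < tab.length then
              some (if pvVal tab p.1 p.2 = (heap.headD []).headD 0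
                then (p.1, p.2 + 1) else p)
             else none).map (pvSfx tab)) (frontsOf tab st)
        rwa [hpieceM, hpieceN] at h
      -- B's new queue: sorted, and a permutation of the advanced fronts
      obtain ⟨hsort', hperm'⟩ := pvFoldIns_spec
        ((heap.filter (fun s => s.headD 0 == (heap.headD []).headD 0)).map List.tail)
        (heap.filter (fun s => !(s.headD 0 == (heap.headD []).headD 0))) hrestsorted
      have hheap'perm : List.Perm
          (((heap.filter (fun s => s.headD 0 == (heap.headD []).headD 0)).map
            List.tail).foldl (fun h t => if t.isEmpty then h else pvInsert h t)
            (heap.filter (fun s => !(s.headD 0 == (heap.headD []).headD 0))))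
          ((frontsOf tab (stepSt tab st ((heap.headD []).headD 0))).map (pvSfx tab)) := by
        refine hperm'.trans ?_
        refine ((hfilterN.append htailsf).trans ?_).trans hLHSperm.symm
        exact List.perm_append_comm
      -- the emitted-value condition agrees
      have hcnt : ((heap.filter (fun s => s.headD 0 == (heap.headD []).headD 0)).map
          List.tail).length = (pvValsOf tab st).count ((heap.headD []).headD 0) := by
        rw [List.length_map, ← List.countP_eq_length_filter]
        rw [← hheads.count_eq, pvCount_map]
      -- advance the invariants and close with the induction hypothesis
      have hattain := pvCurMin_attained tab st hInv hnil
      rw [hcur] at hattain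
      have hInv' := pvInv_stepSt tab st ((heap.headD []).headD 0) hInv
      have hmeas' := pvMeas_stepSt_lt tab st ((heap.headD []).headD 0) hInv hattain
      rw [pvBLoop_succ, if_neg (by simpa [List.isEmpty_iff] using hheapne), hpop,
        pvAltRound tab st out f hInv hnil, hcur, hcnt]
      exact ih f (stepSt tab st ((heap.headD []).headD 0)) _ _ hInv' (by omega) (by omega)
        hsort' hheap'perm

-- the initial queue of Source B: sorted, and a permutation of the truncated rows
theorem pvInitHeap (tab : List (List Int)) :
    ∀ (rows : List (List Int)) (h : List (List Int)), pvSorted h →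
    pvSorted (rows.foldl (fun h row => pvInsert h (row.take tab.length)) h) ∧
    List.Perm (rows.foldl (fun h row => pvInsert h (row.take tab.length)) h)
      (h ++ rows.map (fun row => row.take tab.length)) := by
  intro rows
  induction rows with
  | nil => exact fun h hs => ⟨hs, by simp⟩
  | cons row rows ih =>
    intro h hs
    rw [List.foldl_cons, List.map_cons]
    obtain ⟨hins, hperm⟩ := pvInsert_spec h (row.take tab.length) hs
    obtain ⟨ih1, ih2⟩ := ih (pvInsert h (row.take tab.length)) hins
    refine ⟨ih1, ih2.trans ((hperm.append_right _).trans ?_)⟩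
    show List.Perm (row.take tab.length :: (h ++ _)) (h ++ row.take tab.length :: _)
    exact List.perm_middle.symm

theorem pvRangeMapGetD {α β : Type} (l : List α) (d : α) (f : α → β) :
    (List.range l.length).map (fun i => f (l.getD i d)) = l.map f := by
  apply List.ext_getElem
  · simp
  · intro i h1 h2
    simp only [List.getElem_map, List.getElem_range]
    rw [List.getD_eq_getElem l d (by simpa using h2)]

-- ===== VERDICT (by name: the statement is the Claim_ definition above) =====
theorem singletons_spec : Claim_equal_singletons := by
  unfold Claim_equal_singletons Spec_singletons
  intro tab _ hPre
  set st0 := (List.replicate tab.length (0 : Nat), List.replicate tab.length false)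
    with hst0
  have hcols0 : ∀ j, j < tab.length → pvCols st0 j = 0 := by
    intro j hj
    rw [hst0]
    unfold pvCols
    simp [List.getD]
  have hInv0 : InvA tab st0 := by
    refine ⟨by simp [hst0], by simp [hst0], ?_⟩
    intro j hj
    rw [hcols0 j hj]
    refine ⟨by omega, ?_⟩
    rw [hst0]
    have : tab.length ≠ 0 := by omega
    simp [List.getD]
    omega
  have hmeas0 : measA tab st0 = tab.length * tab.length := by
    unfold measA
    rw [Finset.sum_congr rfl (fun j hj => by
      rw [hcols0 j (Finset.mem_range.mp hj)])]
    simp [Finset.sum_const, Finset.card_range]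
  have hfr0 : frontsOf tab st0 = (List.range tab.length).map (fun i => (i, 0)) := by
    unfold frontsOf
    have hc : ∀ j ∈ List.range tab.length,
        (if pvCols st0 j = tab.length then none else some (j, pvCols st0 j)) =
          some (j, 0) := by
      intro j hj
      have hjl := List.mem_range.mp hj
      rw [hcols0 j hjl]
      rw [if_neg (by omega)]
    rw [List.filterMap_congr hc]
    simp
  have hmain := pvMain tab (tab.length * tab.length + 1) st0 [] hInv0
    (le_of_eq (by rw [hmeas0])) (by simp [hmeas0])
  rw [hmeas0] at hmain
  simp only [List.nil_append, List.length_nil, Nat.sub_zero] at hmain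
  -- B's side: initial queue and the bridge
  obtain ⟨hS0, hP0⟩ := pvInitHeap tab tab []
    (by unfold pvSorted; exact List.Pairwise.nil)
  have hP0' : List.Perm (tab.foldl (fun h row => pvInsert h (row.take tab.length)) [])
      ((frontsOf tab st0).map (pvSfx tab)) := by
    rw [hfr0, List.map_map]
    have : ((fun i => (i, 0)) : Nat → Nat × Nat) = (fun i => ((i : Nat), (0:Nat))) := rfl
    have hmap : (List.range tab.length).map (pvSfx tab ∘ fun i => (i, 0)) =
        tab.map (fun row => row.take tab.length) := by
      have := pvRangeMapGetD tab ([] : List Int)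
        (fun row => row.take tab.length)
      rw [← this]
      apply List.map_congr_left
      intro i hi
      simp [pvSfx]
    rw [hmap]
    simpa using hP0
  have hbridge := pvBridge tab hPre (tab.length * tab.length)
    (tab.length * tab.length + 1) st0
    (tab.foldl (fun h row => pvInsert h (row.take tab.length)) []) []
    hInv0 (le_of_eq hmeas0) (by omega) hS0 hP0'
  show singletonsLoop tab (tab.length * tab.length + 1) st0
      (List.replicate (tab.length * tab.length) 0) 0 = singletons_alt tab
  have halt : singletons_alt tab =
      pvBLoop (tab.length * tab.length + 1)
        (tab.foldl (fun h row => pvInsert h (row.take tab.length)) []) [] ++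
      List.replicate (tab.length * tab.length -
        (pvBLoop (tab.length * tab.length + 1)
          (tab.foldl (fun h row => pvInsert h (row.take tab.length)) []) []).length) 0 := rfl
  rw [halt, hbridge, hmain]
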